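-- pv_equiv track=rewrite | github.com/Sandeep2027/TCS_CODEVITA | StringPuzzle.py | calculate_string_value
-- ===== SOURCE A (Python) =====
-- def calculate_string_value(edges, input_string):
--     from collections import defaultdict, deque
--
--     # Create the graph
--     graph = defaultdict(list)
--     in_degree = defaultdict(int)
--
--     # Build the graph and track in-degrees
--     for edge in edges:
--         u, v = edge.split()
--         graph[u].append(v)
--         in_degree[v] += 1
--         if u not in in_degree:
--             in_degree[u] = 0  # Ensure every node is in in_degree
--
--     # Determine levels using BFS
--     level = {}
--     queue = deque()
--
--     # Initialize levels for nodes with no incoming edges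
--     for word in in_degree:
--         if in_degree[word] == 0:
--             level[word] = 1
--             queue.append(word)
--
--     while queue:
--         current = queue.popleft()
--         current_level = level[current]
--
--         for neighbor in graph[current]:
--             if neighbor not in level:
--                 level[neighbor] = current_level + 1
--             else:
--                 level[neighbor] = max(level[neighbor], current_level + 1)
--             in_degree[neighbor] -= 1
--             if in_degree[neighbor] == 0:
--                 queue.append(neighbor)
--
--     # Calculate the value of the input string
--     words = input_string.split()
--     total_value = 0
--
--     for word in words:
--         total_value += level.get(word, 1)  # Default level is 1 if not found
--
--     return total_value
-- ===== SOURCE B (Python) =====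
-- def calculate_string_value(edges, input_string):
--     # Round-based longest-path fixpoint over a reverse-adjacency map.
--     preds = {}
--     for edge in edges:
--         u, v = edge.split()
--         preds.setdefault(u, [])
--         preds.setdefault(v, []).append(u)
--     levels = {}
--     for _ in range(len(preds)):
--         nxt = {}
--         for node, ps in preds.items():
--             if node in levels:
--                 nxt[node] = levels[node]
--             elif all(p in levels for p in ps):
--                 nxt[node] = 1 + max((levels[p] for p in ps), default=0)
--         levels = nxt
--     return sum(levels.get(word, 1) for word in input_string.split())
-- ===== Notes on version B (the rewrite author's own statement) =====
-- stated objective: alternative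
-- what changed: Replaces A's Kahn BFS (successor lists, in-degree counters, a FIFO queue) by a round-based longest-path fixpoint over a reverse-adjacency map, rebuilding the level table once per round and summing levels.get(word, 1).
-- intended difference: On inputs whose string contains a word that lies on or downstream of a cycle but has at least one acyclically-levelled predecessor, A returns a partial level left over in its BFS dict (1 + max over resolved predecessors) while B returns the default 1; such a node has no topological level, so the documented default 1 is the intended value. — e.g. on calculate_string_value(["a b", "b a", "c b"], "b"): A returns 2, B returns 1
import Mathlib
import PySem

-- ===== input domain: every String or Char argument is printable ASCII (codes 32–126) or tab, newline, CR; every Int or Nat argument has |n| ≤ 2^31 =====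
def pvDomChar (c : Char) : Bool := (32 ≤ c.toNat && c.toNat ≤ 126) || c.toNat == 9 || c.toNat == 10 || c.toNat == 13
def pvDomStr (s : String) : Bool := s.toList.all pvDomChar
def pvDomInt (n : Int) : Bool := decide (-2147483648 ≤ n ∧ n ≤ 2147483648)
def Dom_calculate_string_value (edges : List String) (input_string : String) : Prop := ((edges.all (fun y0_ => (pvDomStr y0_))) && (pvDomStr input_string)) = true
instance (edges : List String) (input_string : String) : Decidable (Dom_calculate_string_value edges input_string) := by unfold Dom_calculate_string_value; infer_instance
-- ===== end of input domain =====

-- B replaces A's Kahn queue/in-degree BFS by a round-based longest-path fixpoint over a reverse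
-- adjacency map (objective: alternative algorithm of similar cost; no speed claim); on words on or
-- downstream of a cycle that have a levelled predecessor, B returns the default 1 where A returns a
-- leftover partial level (see D_ below).

-- ===== PORT A =====
-- Build phase: graph (successor lists) and in_degree, exactly as A's first loop.
def pvABuild (edges : List String) :
    PySem.Dict String (List String) × PySem.Dict String Int :=
  edges.foldl (fun st edge =>
    match PySem.Str.split₀ edge with
    | [u, v] =>
        (st.1.modify u [] (fun l => l ++ [v]),
         let ind := st.2.insert v (st.2.getD v 0 + 1)
         if ind.contains u then ind else ind.insert u 0)
    | _ => st)   -- Python raises ValueError on such an edge; excluded by Pre_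
    (PySem.Dict.empty, PySem.Dict.empty)

-- A's source-initialisation loop over in_degree's keys.
def pvAInit (indeg : PySem.Dict String Int) : PySem.Dict String Int × List String :=
  indeg.keys.foldl (fun st w =>
    if indeg.getD w 0 == 0 then (st.1.insert w 1, st.2 ++ [w]) else st)
    (PySem.Dict.empty, [])

-- A's BFS while-loop.  The Nat argument is a fuel guard that only makes the recursion total;
-- under Pre_ the fuel passed below is proved sufficient (each dequeue processes a fresh node).
def pvABfs (graph : PySem.Dict String (List String)) :
    Nat → PySem.Dict String Int → PySem.Dict String Int → List String → PySem.Dict String Int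
  | 0, level, _, _ => level
  | _ + 1, level, _, [] => level
  | fuel + 1, level, indeg, c :: q =>
      let cl := level.getD c 0
      let st := (graph.getD c []).foldl (fun st n =>
        let lv := match st.1.get? n with
          | none => st.1.insert n (cl + 1)
          | some old => st.1.insert n (max old (cl + 1))
        let ind := st.2.1.insert n (st.2.1.getD n 0 - 1)
        let qu := if ind.getD n 0 == 0 then st.2.2 ++ [n] else st.2.2
        (lv, ind, qu)) (level, indeg, q)
      pvABfs graph fuel st.1 st.2.1 st.2.2

def calculate_string_value (edges : List String) (input_string : String) : Int :=
  let b := pvABuild edges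
  let iq := pvAInit b.2
  let level := pvABfs b.1 (2 * edges.length + 1) iq.1 b.2 iq.2
  (PySem.Str.split₀ input_string).foldl (fun total w => total + level.getD w 1) 0

-- ===== PORT B =====
-- Reverse-adjacency map: preds[v] = list of u over edges "u v" (every endpoint becomes a key).
def pvBPreds (edges : List String) : PySem.Dict String (List String) :=
  edges.foldl (fun d edge =>
    match PySem.Str.split₀ edge with
    | [u, v] => ((d.setdefault u []).setdefault v []).modify v [] (fun l => l ++ [u])
    | _ => d)   -- Python raises ValueError on such an edge; excluded by Pre_
    PySem.Dict.empty

-- One fixpoint round: rebuild the level table from the previous one.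
def pvBRound (preds : PySem.Dict String (List String)) (levels : PySem.Dict String Int) :
    PySem.Dict String Int :=
  preds.items.foldl (fun nxt p =>
    if levels.contains p.1 then nxt.insert p.1 (levels.getD p.1 0)
    else if p.2.all (fun q => levels.contains q) then
      nxt.insert p.1 (1 + PySem.List.maxD (p.2.map (fun q => levels.getD q 0)) (fun x => x) 0)
    else nxt) PySem.Dict.empty

def calculate_string_value_alt (edges : List String) (input_string : String) : Int :=
  let preds := pvBPreds edges
  let levels := (List.range preds.size).foldl (fun levels _ => pvBRound preds levels)
    PySem.Dict.empty
  (PySem.Str.split₀ input_string).foldl (fun total w => total + levels.getD w 1) 0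

-- ===== PRECONDITION & SPEC =====
-- Spec-side notions used by D_ (independent of both ports): the parsed edge list, and the
-- resolvability predicate pvOk (a node is resolvable iff no ancestor lies on a cycle; the fuel
-- 2*|E|+2 exceeds the node count, past which pvOk is stationary).
def pvE (edges : List String) : List (String × String) :=
  edges.filterMap fun e => match PySem.Str.split₀ e with | [u, v] => some (u, v) | _ => none

def pvOk (E : List (String × String)) : Nat → String → Bool
  | 0, _ => false
  | k + 1, v => E.all fun p => p.2 != v || pvOk E k p.1

def pvOkL (edges : List String) (v : String) : Bool :=
  pvOk (pvE edges) (2 * edges.length + 2) v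

-- Pre_ excludes exactly the edges on which `u, v = edge.split()` raises ValueError in A
-- (an edge string whose whitespace-split does not have exactly two tokens).
def Pre_calculate_string_value (edges : List String) (input_string : String) : Prop :=
  ∀ e ∈ edges, (PySem.Str.split₀ e).length = 2
instance (edges : List String) (input_string : String) :
    Decidable (Pre_calculate_string_value edges input_string) := by
  unfold Pre_calculate_string_value; infer_instance

def pvWitness_calculate_string_value : List String × String := (["a b", "b c"], "a b c d")

-- On inputs whose string contains a word that is a node without a topological level (it is on or
-- downstream of a cycle) but with at least one levelled predecessor, A returns the partial level
-- 1 + max over levelled predecessors left over in its BFS dict, while B returns the default 1;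
-- such a node has no topological level, so the documented default 1 is the intended value.
def D_calculate_string_value (edges : List String) (input_string : String) : Prop :=
  ∃ p ∈ pvE edges, p.2 ∈ PySem.Str.split₀ input_string ∧
    pvOkL edges p.2 = false ∧ pvOkL edges p.1 = true
instance (edges : List String) (input_string : String) :
    Decidable (D_calculate_string_value edges input_string) := by
  unfold D_calculate_string_value; infer_instance

def Spec_calculate_string_value (edges : List String) (input_string : String) (out : Int) : Prop :=
  ¬ D_calculate_string_value edges input_string →
    out = calculate_string_value_alt edges input_string
instance (edges : List String) (input_string : String) (out : Int) :
    Decidable (Spec_calculate_string_value edges input_string out) := by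
  unfold Spec_calculate_string_value; infer_instance

def pvDiffWitness_calculate_string_value : List String × String := (["a b", "b a", "c b"], "b")
def pvDiffWitnessOut_calculate_string_value : Int × Int := (2, 1)

-- ===== CLAIM (what is proved, stated in full; the proofs are below) =====
def Claim_unchanged_calculate_string_value : Prop := ∀ (edges : List String) (input_string : String), Dom_calculate_string_value edges input_string → Pre_calculate_string_value edges input_string → Spec_calculate_string_value edges input_string (calculate_string_value edges input_string)
def Claim_changed_calculate_string_value : Prop := Dom_calculate_string_value (pvDiffWitness_calculate_string_value.1) (pvDiffWitness_calculate_string_value.2) ∧ Pre_calculate_string_value (pvDiffWitness_calculate_string_value.1) (pvDiffWitness_calculate_string_value.2) ∧ D_calculate_string_value (pvDiffWitness_calculate_string_value.1) (pvDiffWitness_calculate_string_value.2) ∧ calculate_string_value (pvDiffWitness_calculate_string_value.1) (pvDiffWitness_calculate_string_value.2) = pvDiffWitnessOut_calculate_string_value.1 ∧ calculate_string_value_alt (pvDiffWitness_calculate_string_value.1) (pvDiffWitness_calculate_string_value.2) = pvDiffWitnessOut_calculate_string_value.2 ∧ pvDiffWitnessOut_calculate_string_value.1 ≠ pvDiffW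itnessOut_calculate_string_value.2
def Claim_exact_calculate_string_value : Prop := ∀ (edges : List String) (input_string : String), Dom_calculate_string_value edges input_string → Pre_calculate_string_value edges input_string → D_calculate_string_value edges input_string → calculate_string_value edges input_string ≠ calculate_string_value_alt edges input_string

-- ===== LEMMAS AND PROOFS =====

-- ---- further spec-side graph notions (proof-only) ----
def pvPr (E : List (String × String)) (v : String) : List String :=
  (E.filter (fun p => p.2 == v)).map (fun p => p.1)

def pvNodeL (E : List (String × String)) : List String :=
  PySem.List.dedup (E.flatMap (fun p => [p.1, p.2]))

def pvM (l : List Int) : Int := l.foldl max 0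

def pvH (E : List (String × String)) : Nat → String → Option Int
  | 0, _ => none
  | k + 1, v =>
      if (pvPr E v).all (fun u => (pvH E k u).isSome) then
        some (1 + pvM ((pvPr E v).map (fun u => (pvH E k u).getD 0)))
      else none

def pvHv (E : List (String × String)) (v : String) : Option Int :=
  pvH E (pvNodeL E).length v

def pvSucc (E : List (String × String)) (u : String) : List String :=
  (E.filter (fun p => p.1 == u)).map (fun p => p.2)

def pvHD (E : List (String × String)) (v : String) : Int := (pvHv E v).getD 0

def pvLvlVal (E : List (String × String)) (P : List String) (v : String) : Int :=
  1 + pvM (((pvPr E v).filter (fun u => decide (u ∈ P))).map (pvHD E))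

def pvLvlSpec (E : List (String × String)) (P : List String) (v : String) : Option Int :=
  if v ∈ pvNodeL E ∧ (pvPr E v = [] ∨ ∃ u ∈ pvPr E v, u ∈ P) then some (pvLvlVal E P v)
  else none

def pvPfin (E : List (String × String)) : List String :=
  (pvNodeL E).filter (fun v => (pvHv E v).isSome)

def pvLS (E : List (String × String)) (k : Nat) (v : String) : Option Int :=
  if v ∈ pvNodeL E then pvH E k v else none

structure pvInv (E : List (String × String)) (P : List String)
    (level indeg : PySem.Dict String Int) (queue : List String) : Prop where
  pnd : P.Nodup
  psub : ∀ v ∈ P, v ∈ pvNodeL E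
  pclosed : ∀ v ∈ P, ∀ u ∈ pvPr E v, u ∈ P
  pdef : ∀ v ∈ P, (pvHv E v).isSome
  qiff : ∀ v, v ∈ queue ↔ (v ∈ pvNodeL E ∧ v ∉ P ∧ ∀ u ∈ pvPr E v, u ∈ P)
  qnd : queue.Nodup
  ideg : ∀ v, indeg.getD v 0 = (((pvPr E v).filter (fun u => decide (u ∉ P))).length : Int)
  lvl : ∀ v, level.get? v = pvLvlSpec E P v

-- ---- small max lemmas ----
theorem pvM_nonneg (l : List Int) : 0 ≤ pvM l := (PySem.List.le_foldl_max l 0).1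
theorem pvM_le_of_mem {l : List Int} {x : Int} (h : x ∈ l) : x ≤ pvM l :=
  (PySem.List.le_foldl_max l 0).2 x h
theorem pv_foldl_max_eq (l : List Int) (a : Int) (ha : 0 ≤ a) :
    l.foldl max a = max a (pvM l) := by
  induction l generalizing a with
  | nil => simp [pvM]; omega
  | cons x t ih =>
      have h1 : (0:Int) ≤ max a x := le_trans ha (le_max_left _ _)
      have h2 : (0:Int) ≤ max 0 x := le_max_left _ _
      simp only [pvM, List.foldl_cons] at *
      rw [ih (max a x) h1, ih (max 0 x) h2]
      simp only [Int.max_def]; split_ifs <;> omega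
theorem pvM_cons {x : Int} (t : List Int) (hx : 0 ≤ x) : pvM (x :: t) = max x (pvM t) := by
  have : pvM (x :: t) = t.foldl max (max 0 x) := rfl
  rw [this, pv_foldl_max_eq t (max 0 x) (le_max_left _ _), max_eq_right hx]
theorem pv_maxD_eq_pvM (l : List Int) (h : ∀ x ∈ l, 0 ≤ x) :
    PySem.List.maxD l (fun x => x) 0 = pvM l := by
  cases l with
  | nil => rfl
  | cons x t =>
      have hx : (0:Int) ≤ x := h x (by simp)
      rw [PySem.List.maxD, PySem.List.max?_id_cons]
      show t.foldl max x = pvM (x :: t)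
      rw [pvM_cons t hx, pv_foldl_max_eq t x hx]
theorem pvM_filter_or (l : List String) (f : String → Int) (p : String → Bool) (c : String)
    (hc : c ∈ l) (hpc : p c = false) (hf : 0 ≤ f c) (hnn : ∀ x ∈ l, 0 ≤ f x) :
    pvM ((l.filter (fun u => p u || u == c)).map f) =
      max (pvM ((l.filter p).map f)) (f c) := by
  induction l with
  | nil => simp at hc
  | cons y t ih =>
      have hnt : ∀ x ∈ t, 0 ≤ f x := fun x hx => hnn x (by simp [hx])
      by_cases hyc : y = c
      · subst hyc
        simp only [List.filter_cons, hpc, Bool.false_or, BEq.rfl, if_true,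
          Bool.false_eq_true, if_false, List.map_cons]
        rw [pvM_cons _ hf]
        by_cases hct : y ∈ t
        · rw [ih hct hnt]
          simp only [Int.max_def]; split_ifs <;> omega
        · have h1 : t.filter (fun u => p u || u == y) = t.filter p := by
            apply List.filter_congr
            intro x hx
            have : (x == y) = false := by
              simp only [beq_eq_false_iff_ne]; rintro rfl; exact hct hx
            simp [this]
          rw [h1, max_comm]
      · have hct : c ∈ t := by
          rcases List.mem_cons.mp hc with h | h
          · exact absurd h.symm hyc
          · exact h
        have hyc' : (y == c) = false := by simp [hyc]
        by_cases hpy : p y = true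
        · simp only [List.filter_cons, hpy, Bool.true_or, if_true, List.map_cons]
          rw [pvM_cons _ (hnn y (by simp)), pvM_cons _ (hnn y (by simp)), ih hct hnt]
          simp only [Int.max_def]; split_ifs <;> omega
        · simp only [List.filter_cons, hyc', hpy] at *
          simpa using ih hct hnt
theorem pv_filter_len_split (l : List String) (P : List String) (c : String) (hc : c ∉ P) :
    (l.filter (fun u => decide (u ∉ P))).length =
      (l.filter (fun u => decide (u ∉ P ++ [c]))).length + l.count c := by
  induction l with
  | nil => simp
  | cons y t ih =>
      by_cases hyc : y = c
      · subst hyc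
        simp only [List.filter_cons, List.count_cons, decide_eq_true_eq]
        rw [if_pos (by exact hc), if_neg (by simp)]
        simp only [List.length_cons, beq_self_eq_true, if_true]
        omega
      · simp only [List.filter_cons, List.count_cons, decide_eq_true_eq]
        have hmem : (y ∉ P ++ [c]) ↔ (y ∉ P) := by simp [hyc]
        have hbeq : (y == c) = false := by simp [hyc]
        by_cases hyP : y ∈ P
        · rw [if_neg (by simp [hyP]), if_neg (by simp [hyP]), hbeq]; simpa using ih
        · rw [if_pos hyP, if_pos (hmem.mpr hyP), hbeq]; simp only [List.length_cons]
          simp only [Bool.false_eq_true, if_false]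
          omega

-- ---- graph basics ----
theorem pv_mem_nodeL {E : List (String × String)} {v : String} :
    v ∈ pvNodeL E ↔ ∃ p ∈ E, p.1 = v ∨ p.2 = v := by
  rw [pvNodeL, PySem.List.dedup_eq_ofList, PySem.Set.mem_ofList, List.mem_flatMap]
  constructor
  · rintro ⟨p, hp, hv⟩
    exact ⟨p, hp, by simpa [eq_comm] using hv⟩
  · rintro ⟨p, hp, hv⟩
    exact ⟨p, hp, by simpa [eq_comm] using hv⟩

theorem pvPr_nil_of_not_node {E : List (String × String)} {v : String}
    (h : v ∉ pvNodeL E) : pvPr E v = [] := by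
  rw [pvPr, List.map_eq_nil_iff, List.filter_eq_nil_iff]
  intro p hp hbv
  exact h (pv_mem_nodeL.mpr ⟨p, hp, Or.inr (by simpa using hbv)⟩)
theorem pv_mem_node_of_mem_pr {E : List (String × String)} {v u : String}
    (h : u ∈ pvPr E v) : u ∈ pvNodeL E := by
  rw [pvPr] at h
  obtain ⟨p, hp, rfl⟩ := List.mem_map.mp h
  exact pv_mem_nodeL.mpr ⟨p, (List.mem_filter.mp hp).1, Or.inl rfl⟩
theorem pv_node_of_pr_ne_nil {E : List (String × String)} {v : String}
    (h : pvPr E v ≠ []) : v ∈ pvNodeL E := by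
  by_contra hn
  exact h (pvPr_nil_of_not_node hn)
theorem pv_count_succ_pr (E : List (String × String)) (c v : String) :
    (pvSucc E c).count v = (pvPr E v).count c := by
  induction E with
  | nil => rfl
  | cons p t ih =>
      simp only [pvSucc, pvPr, List.filter_cons] at *
      by_cases h1 : p.1 = c <;> by_cases h2 : p.2 = v <;>
        simp [h1, h2, List.count_cons, ih] <;> omega
theorem pv_mem_succ_iff (E : List (String × String)) (c v : String) :
    v ∈ pvSucc E c ↔ c ∈ pvPr E v := by
  rw [← List.count_pos_iff, ← List.count_pos_iff, pv_count_succ_pr]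
theorem pv_nodeL_nodup (E : List (String × String)) : (pvNodeL E).Nodup := by
  rw [pvNodeL, PySem.List.dedup_eq_ofList]
  exact PySem.Set.nodup_ofList _
theorem pv_nodup_sub_len {l m : List String} (h : l.Nodup) (hs : ∀ x ∈ l, x ∈ m) :
    l.length ≤ m.length :=
  (List.subperm_of_subset h hs).length_le

theorem pv_nodeL_len_le (E : List (String × String)) :
    (pvNodeL E).length ≤ 2 * E.length := by
  have h1 : (pvNodeL E).length ≤ (E.flatMap (fun p => [p.1, p.2])).length := by
    apply pv_nodup_sub_len (pv_nodeL_nodup E)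
    intro x hx
    rw [pvNodeL, PySem.List.dedup_eq_ofList, PySem.Set.mem_ofList] at hx
    exact hx
  have h2 : (E.flatMap (fun p => [p.1, p.2])).length = 2 * E.length := by
    simp [List.length_flatMap]
    induction E with
    | nil => rfl
    | cons p t ih => simp [ih]; omega
  omega
theorem pvE_len_le (edges : List String) : (pvE edges).length ≤ edges.length :=
  List.length_filterMap_le _ _

-- ---- pvH theory ----
theorem pvH_zero (E : List (String × String)) (v : String) : pvH E 0 v = none := rfl

theorem pvH_succ (E : List (String × String)) (k : Nat) (v : String) :
    pvH E (k + 1) v =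
      if (pvPr E v).all (fun u => (pvH E k u).isSome) then
        some (1 + pvM ((pvPr E v).map (fun u => (pvH E k u).getD 0)))
      else none := rfl

theorem pv_all_congr {l : List String} {p q : String → Bool}
    (h : ∀ x ∈ l, p x = q x) : l.all p = l.all q := by
  induction l with
  | nil => rfl
  | cons y t ih =>
      simp only [List.all_cons, h y (by simp)]
      rw [ih (fun x hx => h x (by simp [hx]))]

theorem pvH_mono_eq (E : List (String × String)) (k : Nat) :
    ∀ v, (pvH E k v).isSome → pvH E (k + 1) v = pvH E k v := by
  induction k with
  | zero => intro v h; rw [pvH_zero] at h; simp at h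
  | succ k ih =>
      intro v h
      rw [pvH_succ] at h
      by_cases hall : (pvPr E v).all (fun u => (pvH E k u).isSome) = true
      · rw [List.all_eq_true] at hall
        have hall' : (pvPr E v).all (fun u => (pvH E (k + 1) u).isSome) = true := by
          rw [List.all_eq_true]
          intro u hu
          rw [ih u (hall u hu)]; exact hall u hu
        rw [pvH_succ E (k + 1), pvH_succ E k, if_pos hall',
          if_pos (List.all_eq_true.mpr hall)]
        have hm : (pvPr E v).map (fun u => (pvH E (k + 1) u).getD 0) =
            (pvPr E v).map (fun u => (pvH E k u).getD 0) :=
          List.map_congr_left (fun u hu => by rw [ih u (hall u hu)])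
        rw [hm]
      · rw [if_neg hall] at h; simp at h
def pvStab (E : List (String × String)) (k : Nat) : Prop :=
  ∀ v ∈ pvNodeL E, pvH E k v = pvH E (k + 1) v

theorem pvH_congr_step (E : List (String × String)) (k k' : Nat)
    (h : ∀ u ∈ pvNodeL E, pvH E k u = pvH E k' u) :
    ∀ v ∈ pvNodeL E, pvH E (k + 1) v = pvH E (k' + 1) v := by
  intro v _
  have hpr : ∀ u ∈ pvPr E v, pvH E k u = pvH E k' u :=
    fun u hu => h u (pv_mem_node_of_mem_pr hu)
  rw [pvH_succ E k, pvH_succ E k']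
  rw [pv_all_congr (fun u hu => by rw [hpr u hu]),
    List.map_congr_left (fun u hu => by rw [hpr u hu])]

theorem pvStab_step (E : List (String × String)) (k : Nat) (h : pvStab E k) :
    pvStab E (k + 1) :=
  fun v hv => (pvH_congr_step E k (k + 1) (fun u hu => h u hu) v hv).symm ▸
    (pvH_congr_step E k (k + 1) (fun u hu => h u hu) v hv)

theorem pvStab_ge (E : List (String × String)) (k : Nat) (h : pvStab E k) :
    ∀ j, ∀ v ∈ pvNodeL E, pvH E (k + j) v = pvH E k v := by
  have hstab : ∀ j, pvStab E (k + j) := by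
    intro j
    induction j with
    | zero => exact h
    | succ j ih => exact pvStab_step E (k + j) ih
  intro j
  induction j with
  | zero => intro v _; rfl
  | succ j ih =>
      intro v hv
      have := (hstab j v hv).symm
      rw [show k + (j + 1) = (k + j) + 1 from rfl, this]
      exact ih v hv

theorem pv_filter_lt {l : List String} {p q : String → Bool}
    (h : ∀ x ∈ l, p x = true → q x = true) {v : String} (hv : v ∈ l)
    (hq : q v = true) (hp : p v = false) :
    (l.filter p).length < (l.filter q).length := by
  suffices h2 : l.countP p < l.countP q by
    simpa [List.countP_eq_length_filter] using h2
  induction l with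
  | nil => simp at hv
  | cons y t ih =>
      rcases List.mem_cons.mp hv with rfl | hvt
      · rw [List.countP_cons_of_neg (by simp [hp]), List.countP_cons_of_pos hq]
        have := List.countP_mono_left (l := t) (p := p) (q := q)
          (fun x hx => h x (by simp [hx]))
        omega
      · have := ih (fun x hx hpx => h x (by simp [hx]) hpx) hvt
        have hyq := h y (by simp)
        by_cases hpy : p y = true
        · rw [List.countP_cons_of_pos hpy, List.countP_cons_of_pos (hyq hpy)]; omega
        · rw [List.countP_cons_of_neg (by simp [hpy])]
          by_cases hqy : q y = true
          · rw [List.countP_cons_of_pos hqy]; omega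
          · rw [List.countP_cons_of_neg (by simp [hqy])]; omega

theorem pvStab_N (E : List (String × String)) : pvStab E (pvNodeL E).length := by
  set N := (pvNodeL E).length with hN
  have hor : ∀ k, pvStab E k ∨
      k ≤ ((pvNodeL E).filter (fun v => (pvH E k v).isSome)).length := by
    intro k
    induction k with
    | zero => exact Or.inr (Nat.zero_le _)
    | succ k ih =>
        rcases ih with hst | hcard
        · exact Or.inl (pvStab_step E k hst)
        · by_cases hst : pvStab E k
          · exact Or.inl (pvStab_step E k hst)
          · right
            rw [pvStab] at hst
            push_neg at hst
            obtain ⟨v, hv, hne⟩ := hst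
            have hnone : pvH E k v = none := by
              cases hk : pvH E k v with
              | none => rfl
              | some m =>
                  exact absurd (pvH_mono_eq E k v (by rw [hk]; rfl)).symm hne
            have hsome : (pvH E (k + 1) v).isSome := by
              cases hk : pvH E (k + 1) v with
              | none => exact absurd (by rw [hnone, hk]) hne
              | some m => rfl
            have hlt := pv_filter_lt (l := pvNodeL E)
              (p := fun w => (pvH E k w).isSome) (q := fun w => (pvH E (k + 1) w).isSome)
              (fun x _ hx => by simp only at hx ⊢; rw [pvH_mono_eq E k x hx]; exact hx)
              hv hsome (by simp only; rw [hnone]; rfl)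
            omega
  rcases hor N with hst | hcard
  · exact hst
  · have hle : ((pvNodeL E).filter (fun v => (pvH E N v).isSome)).length ≤ N :=
      le_trans (List.length_filter_le _ _) (le_of_eq hN.symm)
    have heq : ((pvNodeL E).filter (fun v => (pvH E N v).isSome)).length =
        (pvNodeL E).length := le_antisymm (List.length_filter_le _ _) (by omega)
    have hfe := (List.filter_sublist (l := pvNodeL E)
      (p := fun v => (pvH E N v).isSome)).eq_of_length heq
    intro v hv
    have hvs : (pvH E N v).isSome := by
      have hmem : v ∈ (pvNodeL E).filter (fun v => (pvH E N v).isSome) := by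
        rw [hfe]; exact hv
      exact (List.mem_filter.mp hmem).2
    exact (pvH_mono_eq E N v hvs).symm

theorem pvH_stable (E : List (String × String)) (j : Nat) :
    ∀ v ∈ pvNodeL E, pvH E ((pvNodeL E).length + j) v = pvHv E v :=
  fun v hv => pvStab_ge E (pvNodeL E).length (pvStab_N E) j v hv
theorem pvHv_fix {E : List (String × String)} {v : String} (hv : v ∈ pvNodeL E)
    (h : ∀ u ∈ pvPr E v, (pvHv E u).isSome) :
    pvHv E v = some (1 + pvM ((pvPr E v).map (pvHD E))) := by
  have h1 := pvH_stable E 1 v hv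
  rw [← h1, pvH_succ,
    if_pos (show ((pvPr E v).all fun u => (pvH E (pvNodeL E).length u).isSome) = true from
      List.all_eq_true.mpr h)]
  have : (List.map (fun u => (pvH E (pvNodeL E).length u).getD 0) (pvPr E v)) =
      List.map (pvHD E) (pvPr E v) := List.map_congr_left (fun u _ => rfl)
  rw [this]
theorem pvHv_def_closure {E : List (String × String)} {v : String} (hv : v ∈ pvNodeL E)
    (h : (pvHv E v).isSome) : ∀ u ∈ pvPr E v, (pvHv E u).isSome := by
  have h1 := pvH_stable E 1 v hv
  rw [← h1, pvH_succ] at h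
  by_cases hall : (pvPr E v).all (fun u => (pvH E (pvNodeL E).length u).isSome) = true
  · exact List.all_eq_true.mp hall
  · rw [if_neg hall] at h; simp at h
theorem pvH_pos {E : List (String × String)} {k : Nat} {v : String} {m : Int}
    (h : pvH E k v = some m) : 1 ≤ m := by
  cases k with
  | zero => simp [pvH_zero] at h
  | succ k =>
      rw [pvH_succ] at h
      by_cases hall : (pvPr E v).all (fun u => (pvH E k u).isSome) = true
      · rw [if_pos hall] at h
        have := pvM_nonneg ((pvPr E v).map (fun u => (pvH E k u).getD 0))
        have hm : 1 + pvM ((pvPr E v).map (fun u => (pvH E k u).getD 0)) = m :=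
          Option.some.inj h
        omega
      · rw [if_neg hall] at h; simp at h
theorem pvHD_nonneg (E : List (String × String)) (v : String) : 0 ≤ pvHD E v := by
  rw [pvHD]
  cases h : pvHv E v with
  | none => simp
  | some m => simp; exact le_trans (by omega) (pvH_pos h)

-- ---- fold transfer under Pre_ ----
theorem pv_fold_pairs {σ : Type} (edges : List String)
    (hPre : ∀ e ∈ edges, (PySem.Str.split₀ e).length = 2)
    (g : σ → String × String → σ) (init : σ) :
    edges.foldl (fun st e =>
      match PySem.Str.split₀ e with
      | [u, v] => g st (u, v)
      | _ => st) init = (pvE edges).foldl g init := by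
  induction edges generalizing init with
  | nil => rfl
  | cons e rest ih =>
      obtain ⟨u, v, hsplit⟩ := List.length_eq_two.mp (hPre e (by simp))
      simp only [List.foldl_cons, pvE, List.filterMap_cons, hsplit]
      exact ih (fun e' he' => hPre e' (by simp [he'])) (g init (u, v))

-- ---- build characterisation ----
def pvIStep (d : PySem.Dict String Int) (p : String × String) : PySem.Dict String Int :=
  let ind := d.insert p.2 (d.getD p.2 0 + 1)
  if ind.contains p.1 then ind else ind.insert p.1 0

theorem pvABuild_eq (edges : List String)
    (hPre : ∀ e ∈ edges, (PySem.Str.split₀ e).length = 2) :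
    pvABuild edges =
      ((pvE edges).foldl (fun d p => d.modify p.1 [] (fun l => l ++ [p.2]))
          PySem.Dict.empty,
        (pvE edges).foldl pvIStep PySem.Dict.empty) := by
  rw [show ((pvE edges).foldl (fun d p => d.modify p.1 [] (fun l => l ++ [p.2]))
          PySem.Dict.empty,
        (pvE edges).foldl pvIStep PySem.Dict.empty) =
      (pvE edges).foldl (fun st p =>
        (st.1.modify p.1 [] (fun l => l ++ [p.2]), pvIStep st.2 p))
        (PySem.Dict.empty, PySem.Dict.empty) from
    (PySem.List.foldl_prod_mk _ _ _ _ _).symm]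
  exact pv_fold_pairs edges hPre
    (fun st p => (st.1.modify p.1 [] (fun l => l ++ [p.2]), pvIStep st.2 p))
    (PySem.Dict.empty, PySem.Dict.empty)

theorem pvIStep_getD (d : PySem.Dict String Int) (p : String × String) (w : String) :
    (pvIStep d p).getD w 0 = if w = p.2 then d.getD p.2 0 + 1 else d.getD w 0 := by
  show (if (d.insert p.2 (d.getD p.2 0 + 1)).contains p.1 = true
        then d.insert p.2 (d.getD p.2 0 + 1)
        else (d.insert p.2 (d.getD p.2 0 + 1)).insert p.1 0).getD w 0 = _
  by_cases hc : (d.insert p.2 (d.getD p.2 0 + 1)).contains p.1 = true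
  · rw [if_pos hc, PySem.Dict.getD_insert]
  · rw [if_neg hc]
    have hc' : (d.insert p.2 (d.getD p.2 0 + 1)).contains p.1 = false := by
      simpa using hc
    rw [PySem.Dict.contains_insert] at hc'
    obtain ⟨h1, h2⟩ := Bool.or_eq_false_iff.mp hc'
    rw [PySem.Dict.getD_insert, PySem.Dict.getD_insert]
    by_cases hw : w = p.1
    · have hwp2 : ¬ w = p.2 := by
        rw [hw]; intro h; rw [h] at h1; simp at h1
      rw [if_pos hw, if_neg hwp2, hw, PySem.Dict.getD_of_not_contains d 0 h2]
    · rw [if_neg hw]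

theorem pvIStep_contains (d : PySem.Dict String Int) (p : String × String) (w : String) :
    (pvIStep d p).contains w = true ↔ (w = p.1 ∨ w = p.2 ∨ d.contains w = true) := by
  simp only [pvIStep]
  by_cases hc : (d.insert p.2 (d.getD p.2 0 + 1)).contains p.1 = true
  · simp only [hc, if_true, PySem.Dict.contains_insert]
    rw [PySem.Dict.contains_insert] at hc
    constructor
    · intro h
      rcases Bool.or_eq_true_iff.mp h with h | h
      · exact Or.inr (Or.inl (by simpa using h))
      · exact Or.inr (Or.inr h)
    · rintro (rfl | rfl | h)
      · exact hc
      · simp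
      · simp [h]
  · simp only [Bool.not_eq_true] at hc
    simp only [hc, Bool.false_eq_true, if_false, PySem.Dict.contains_insert]
    constructor
    · intro h
      rcases Bool.or_eq_true_iff.mp h with h | h
      · exact Or.inl (by simpa using h)
      · rcases Bool.or_eq_true_iff.mp h with h | h
        · exact Or.inr (Or.inl (by simpa using h))
        · exact Or.inr (Or.inr h)
    · rintro (rfl | rfl | h)
      · simp
      · simp
      · simp [h]

theorem pvIStep_nodup (d : PySem.Dict String Int) (p : String × String)
    (h : d.keys.Nodup) : (pvIStep d p).keys.Nodup := by
  simp only [pvIStep]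
  by_cases hc : (d.insert p.2 (d.getD p.2 0 + 1)).contains p.1 = true
  · simp only [hc, if_true]
    exact PySem.Dict.nodup_keys_insert _ _ _ h
  · simp only [Bool.not_eq_true] at hc
    simp only [hc, Bool.false_eq_true, if_false]
    exact PySem.Dict.nodup_keys_insert _ _ _ (PySem.Dict.nodup_keys_insert _ _ _ h)

theorem pvIFold_getD (E : List (String × String)) :
    ∀ (d : PySem.Dict String Int) (w : String),
      (E.foldl pvIStep d).getD w 0 = d.getD w 0 + ((pvPr E w).length : Int) := by
  induction E with
  | nil => intro d w; simp [pvPr]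
  | cons p t ih =>
      intro d w
      rw [List.foldl_cons, ih, pvIStep_getD]
      have : pvPr (p :: t) w =
          if p.2 = w then p.1 :: pvPr t w else pvPr t w := by
        rw [pvPr, pvPr, List.filter_cons]
        by_cases h : p.2 = w
        · simp [h]
        · simp [h]
      rw [this]
      by_cases h : p.2 = w
      · subst h; rw [if_pos rfl, if_pos rfl]; simp; omega
      · rw [if_neg h, if_neg (fun hh => h hh.symm)]

theorem pvIFold_contains (E : List (String × String)) :
    ∀ (d : PySem.Dict String Int) (w : String),
      (E.foldl pvIStep d).contains w = true ↔
        (d.contains w = true ∨ ∃ p ∈ E, p.1 = w ∨ p.2 = w) := by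
  induction E with
  | nil => intro d w; simp
  | cons p t ih =>
      intro d w
      rw [List.foldl_cons, ih, pvIStep_contains]
      constructor
      · rintro (h | h)
        · rcases h with rfl | rfl | h
          · exact Or.inr ⟨p, by simp, Or.inl rfl⟩
          · exact Or.inr ⟨p, by simp, Or.inr rfl⟩
          · exact Or.inl h
        · obtain ⟨q, hq, hw⟩ := h
          exact Or.inr ⟨q, by simp [hq], hw⟩
      · rintro (h | h)
        · exact Or.inl (Or.inr (Or.inr h))
        · obtain ⟨q, hq, hw⟩ := h
          rcases List.mem_cons.mp hq with rfl | hqt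
          · rcases hw with h | h
            · exact Or.inl (Or.inl h.symm)
            · exact Or.inl (Or.inr (Or.inl h.symm))
          · exact Or.inr ⟨q, hqt, hw⟩

theorem pvABuild_graph (edges : List String)
    (hPre : ∀ e ∈ edges, (PySem.Str.split₀ e).length = 2) (u : String) :
    (pvABuild edges).1.getD u [] = pvSucc (pvE edges) u := by
  rw [pvABuild_eq edges hPre]
  rw [show (pvE edges).foldl (fun d p => d.modify p.1 [] (fun l => l ++ [p.2]))
        PySem.Dict.empty =
      (pvE edges).foldl (fun d (p : String × String) => d.modify p.1 [] (fun x => x ++ [p.2]))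
        PySem.Dict.empty from rfl]
  rw [PySem.Dict.getD_foldl_modify_append, PySem.Dict.getD_empty]
  rfl
theorem pvABuild_indeg_getD (edges : List String)
    (hPre : ∀ e ∈ edges, (PySem.Str.split₀ e).length = 2) (v : String) :
    (pvABuild edges).2.getD v 0 = ((pvPr (pvE edges) v).length : Int) := by
  rw [pvABuild_eq edges hPre]
  rw [show ((pvE edges).foldl (fun d p => d.modify p.1 [] (fun l => l ++ [p.2]))
        PySem.Dict.empty,
      (pvE edges).foldl pvIStep PySem.Dict.empty).2 =
      (pvE edges).foldl pvIStep PySem.Dict.empty from rfl]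
  rw [pvIFold_getD, PySem.Dict.getD_empty]
  omega
theorem pvABuild_indeg_mem (edges : List String)
    (hPre : ∀ e ∈ edges, (PySem.Str.split₀ e).length = 2) (v : String) :
    v ∈ (pvABuild edges).2.keys ↔ v ∈ pvNodeL (pvE edges) := by
  rw [← PySem.Dict.contains_iff_mem_keys, pv_mem_nodeL, pvABuild_eq edges hPre]
  rw [show ((pvE edges).foldl (fun d p => d.modify p.1 [] (fun l => l ++ [p.2]))
        PySem.Dict.empty,
      (pvE edges).foldl pvIStep PySem.Dict.empty).2 =
      (pvE edges).foldl pvIStep PySem.Dict.empty from rfl]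
  rw [pvIFold_contains]
  simp [PySem.Dict.contains_empty]
theorem pvABuild_indeg_nodup (edges : List String) :
    (pvABuild edges).2.keys.Nodup := by
  rw [pvABuild]
  have : ∀ (st : PySem.Dict String (List String) × PySem.Dict String Int),
      st.2.keys.Nodup →
      (edges.foldl (fun st edge =>
        match PySem.Str.split₀ edge with
        | [u, v] =>
            (st.1.modify u [] (fun l => l ++ [v]),
             let ind := st.2.insert v (st.2.getD v 0 + 1)
             if ind.contains u then ind else ind.insert u 0)
        | _ => st) st).2.keys.Nodup := by
    induction edges with
    | nil => intro st h; exact h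
    | cons e t ih =>
        intro st h
        rw [List.foldl_cons]
        cases hs : PySem.Str.split₀ e with
        | nil => exact ih st h
        | cons a l =>
            cases l with
            | nil => exact ih st h
            | cons b l2 =>
                cases l2 with
                | nil => exact ih _ (pvIStep_nodup st.2 (a, b) h)
                | cons c l3 => exact ih st h
  exact this (PySem.Dict.empty, PySem.Dict.empty)
    (by rw [PySem.Dict.keys_empty]; exact List.nodup_nil)

def pvPStep (d : PySem.Dict String (List String)) (p : String × String) :
    PySem.Dict String (List String) :=
  ((d.setdefault p.1 []).setdefault p.2 []).modify p.2 [] (fun l => l ++ [p.1])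

theorem pv_sd_getD (d : PySem.Dict String (List String)) (k w : String) :
    (d.setdefault k []).getD w [] = d.getD w [] := by
  by_cases hw : w = k
  · rw [hw, PySem.Dict.getD_setdefault_self]
  · rw [PySem.Dict.getD_eq_get?_getD, PySem.Dict.get?_setdefault_of_ne _ _ hw,
      ← PySem.Dict.getD_eq_get?_getD]

theorem pvPStep_getD (d : PySem.Dict String (List String)) (p : String × String)
    (w : String) :
    (pvPStep d p).getD w [] =
      if w = p.2 then d.getD p.2 [] ++ [p.1] else d.getD w [] := by
  rw [pvPStep, PySem.Dict.getD_modify]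
  by_cases hw : w = p.2
  · rw [if_pos hw, if_pos hw, pv_sd_getD, pv_sd_getD]
  · rw [if_neg hw, if_neg hw, pv_sd_getD, pv_sd_getD]

theorem pvPStep_contains (d : PySem.Dict String (List String)) (p : String × String)
    (w : String) :
    (pvPStep d p).contains w = true ↔
      (w = p.1 ∨ w = p.2 ∨ d.contains w = true) := by
  rw [pvPStep, PySem.Dict.contains_modify, PySem.Dict.contains_setdefault,
    PySem.Dict.contains_setdefault]
  simp only [Bool.or_eq_true, beq_iff_eq]
  tauto

theorem pv_sd_nodup (d : PySem.Dict String (List String)) (k : String)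
    (h : d.keys.Nodup) : (d.setdefault k []).keys.Nodup := by
  rw [PySem.Dict.keys_setdefault]
  by_cases hc : d.contains k = true
  · rw [if_pos hc]; exact h
  · rw [if_neg hc]
    have hk : k ∉ d.keys := by
      intro hm
      exact hc ((PySem.Dict.contains_iff_mem_keys d k).mpr hm)
    simp [List.nodup_append, h]
    intro a ha hak
    exact hk (hak ▸ ha)

theorem pvPStep_nodup (d : PySem.Dict String (List String)) (p : String × String)
    (h : d.keys.Nodup) : (pvPStep d p).keys.Nodup := by
  rw [pvPStep]
  have h2 := pv_sd_nodup _ p.2 (pv_sd_nodup d p.1 h)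
  rw [show (((d.setdefault p.1 []).setdefault p.2 []).modify p.2 []
      (fun l => l ++ [p.1])).keys =
    (((d.setdefault p.1 []).setdefault p.2 []).insert p.2
      ((((d.setdefault p.1 []).setdefault p.2 []).getD p.2 []) ++ [p.1])).keys from
    PySem.Dict.keys_modify _ _ _ _]
  have := PySem.Dict.nodup_keys_insert ((d.setdefault p.1 []).setdefault p.2 []) p.2
    ((((d.setdefault p.1 []).setdefault p.2 []).getD p.2 []) ++ [p.1]) h2
  exact this

theorem pvPFold_getD (E : List (String × String)) :
    ∀ (d : PySem.Dict String (List String)) (w : String),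
      (E.foldl pvPStep d).getD w [] = d.getD w [] ++ pvPr E w := by
  induction E with
  | nil => intro d w; simp [pvPr]
  | cons p t ih =>
      intro d w
      rw [List.foldl_cons, ih, pvPStep_getD]
      have hpr : pvPr (p :: t) w =
          if p.2 = w then p.1 :: pvPr t w else pvPr t w := by
        rw [pvPr, pvPr, List.filter_cons]
        by_cases h : p.2 = w
        · simp [h]
        · simp [h]
      rw [hpr]
      by_cases h : p.2 = w
      · subst h; rw [if_pos rfl, if_pos rfl]; simp
      · rw [if_neg h, if_neg (fun hh => h hh.symm)]

theorem pvPFold_contains (E : List (String × String)) :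
    ∀ (d : PySem.Dict String (List String)) (w : String),
      (E.foldl pvPStep d).contains w = true ↔
        (d.contains w = true ∨ ∃ p ∈ E, p.1 = w ∨ p.2 = w) := by
  induction E with
  | nil => intro d w; simp
  | cons p t ih =>
      intro d w
      rw [List.foldl_cons, ih, pvPStep_contains]
      constructor
      · rintro (h | h)
        · rcases h with rfl | rfl | h
          · exact Or.inr ⟨p, by simp, Or.inl rfl⟩
          · exact Or.inr ⟨p, by simp, Or.inr rfl⟩
          · exact Or.inl h
        · obtain ⟨q, hq, hw⟩ := h
          exact Or.inr ⟨q, by simp [hq], hw⟩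
      · rintro (h | h)
        · exact Or.inl (Or.inr (Or.inr h))
        · obtain ⟨q, hq, hw⟩ := h
          rcases List.mem_cons.mp hq with rfl | hqt
          · rcases hw with h | h
            · exact Or.inl (Or.inl h.symm)
            · exact Or.inl (Or.inr (Or.inl h.symm))
          · exact Or.inr ⟨q, hqt, hw⟩

theorem pvBPreds_eq (edges : List String)
    (hPre : ∀ e ∈ edges, (PySem.Str.split₀ e).length = 2) :
    pvBPreds edges = (pvE edges).foldl pvPStep PySem.Dict.empty :=
  pv_fold_pairs edges hPre pvPStep PySem.Dict.empty

theorem pvBPreds_getD (edges : List String)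
    (hPre : ∀ e ∈ edges, (PySem.Str.split₀ e).length = 2) (v : String) :
    (pvBPreds edges).getD v [] = pvPr (pvE edges) v := by
  rw [pvBPreds_eq edges hPre, pvPFold_getD, PySem.Dict.getD_empty, List.nil_append]
theorem pvBPreds_mem (edges : List String)
    (hPre : ∀ e ∈ edges, (PySem.Str.split₀ e).length = 2) (v : String) :
    v ∈ (pvBPreds edges).keys ↔ v ∈ pvNodeL (pvE edges) := by
  rw [← PySem.Dict.contains_iff_mem_keys, pv_mem_nodeL, pvBPreds_eq edges hPre,
    pvPFold_contains]
  simp [PySem.Dict.contains_empty]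
theorem pvBPreds_nodup (edges : List String) : (pvBPreds edges).keys.Nodup := by
  rw [pvBPreds]
  have : ∀ (d : PySem.Dict String (List String)), d.keys.Nodup →
      (edges.foldl (fun d edge =>
        match PySem.Str.split₀ edge with
        | [u, v] => ((d.setdefault u []).setdefault v []).modify v [] (fun l => l ++ [u])
        | _ => d) d).keys.Nodup := by
    induction edges with
    | nil => intro d h; exact h
    | cons e t ih =>
        intro d h
        rw [List.foldl_cons]
        cases hs : PySem.Str.split₀ e with
        | nil => exact ih d h
        | cons a l =>
            cases l with
            | nil => exact ih d h
            | cons b l2 =>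
                cases l2 with
                | nil => exact ih _ (pvPStep_nodup d (a, b) h)
                | cons c l3 => exact ih d h
  exact this PySem.Dict.empty (by rw [PySem.Dict.keys_empty]; exact List.nodup_nil)
theorem pvBPreds_size (edges : List String)
    (hPre : ∀ e ∈ edges, (PySem.Str.split₀ e).length = 2) :
    (pvBPreds edges).size = (pvNodeL (pvE edges)).length := by
  have hperm : (pvBPreds edges).keys.Perm (pvNodeL (pvE edges)) :=
    (List.perm_ext_iff_of_nodup (pvBPreds_nodup edges) (pv_nodeL_nodup _)).mpr
      (fun a => pvBPreds_mem edges hPre a)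
  have hlen := hperm.length_eq
  rw [PySem.Dict.keys, List.length_map] at hlen
  exact hlen

-- ---- generic conditional-insert folds ----
theorem pv_fold_cond_insert_get? (keys : List String) (p : String → Bool)
    (d0 : PySem.Dict String Int) (hnd : keys.Nodup) (v : String) :
    (keys.foldl (fun d w => if p w then d.insert w 1 else d) d0).get? v =
      if v ∈ keys ∧ p v then some 1 else d0.get? v := by
  induction keys generalizing d0 with
  | nil => simp
  | cons y t ih =>
      obtain ⟨hy, hnd'⟩ := List.nodup_cons.mp hnd
      simp only [List.foldl_cons]
      by_cases hvy : v = y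
      · subst hvy
        rw [ih _ hnd']
        rw [if_neg (fun hc => hy hc.1)]
        by_cases hpv : p v = true
        · rw [if_pos hpv, if_pos ⟨by simp, hpv⟩, PySem.Dict.get?_insert_self]
        · rw [if_neg hpv, if_neg (fun hc => hpv hc.2)]
      · have hmem : (v ∈ y :: t ∧ p v = true) ↔ (v ∈ t ∧ p v = true) := by
          constructor
          · rintro ⟨hm, hp⟩
            rcases List.mem_cons.mp hm with h | h
            · exact absurd h hvy
            · exact ⟨h, hp⟩
          · rintro ⟨hm, hp⟩; exact ⟨by simp [hm], hp⟩
        by_cases hpy : p y = true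
        · rw [if_pos hpy, ih _ hnd']
          rw [PySem.Dict.get?_insert_of_ne _ _ hvy]
          by_cases hc : v ∈ t ∧ p v = true
          · rw [if_pos hc, if_pos (hmem.mpr hc)]
          · rw [if_neg hc, if_neg (fun h => hc (hmem.mp h))]
        · rw [if_neg hpy, ih _ hnd']
          by_cases hc : v ∈ t ∧ p v = true
          · rw [if_pos hc, if_pos (hmem.mpr hc)]
          · rw [if_neg hc, if_neg (fun h => hc (hmem.mp h))]

theorem pv_fold_opt_untouched (its : List (String × List String))
    (F : String → List String → Option Int) (d0 : PySem.Dict String Int)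
    (v : String) (hv : v ∉ its.map (fun p => p.1)) :
    (its.foldl (fun nx p =>
        match F p.1 p.2 with
        | some x => nx.insert p.1 x
        | none => nx) d0).get? v = d0.get? v := by
  induction its generalizing d0 with
  | nil => rfl
  | cons a t ih =>
      rw [List.map_cons] at hv
      have hav : v ≠ a.1 := fun h => hv (by simp [h])
      have hvt : v ∉ t.map (fun p => p.1) := fun h => hv (by simp [h])
      simp only [List.foldl_cons]
      rw [ih _ hvt]
      cases hF : F a.1 a.2 with
      | some x => exact PySem.Dict.get?_insert_of_ne _ _ hav
      | none => rfl

theorem pv_fold_opt_insert_get? (its : List (String × List String))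
    (F : String → List String → Option Int) (d0 : PySem.Dict String Int)
    (hnd : (its.map (fun p => p.1)).Nodup) (v : String) :
    (its.foldl (fun nx p =>
        match F p.1 p.2 with
        | some x => nx.insert p.1 x
        | none => nx) d0).get? v =
      match its.find? (fun p => p.1 == v) with
      | some p => (F p.1 p.2).or (d0.get? v)
      | none => d0.get? v := by
  induction its generalizing d0 with
  | nil => rfl
  | cons a t ih =>
      rw [List.map_cons] at hnd
      obtain ⟨ha, hnd'⟩ := List.nodup_cons.mp hnd
      simp only [List.foldl_cons]
      by_cases hav : a.1 = v
      · have hfind : List.find? (fun p => p.1 == v) (a :: t) = some a := by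
          rw [List.find?_cons_of_pos]; simp [hav]
        rw [hfind]
        have hvt : v ∉ t.map (fun p => p.1) := by rw [← hav]; exact ha
        rw [pv_fold_opt_untouched t F _ v hvt]
        show (match F a.1 a.2 with
          | some x => d0.insert a.1 x
          | none => d0).get? v = (F a.1 a.2).or (d0.get? v)
        cases hF : F a.1 a.2 with
        | some x => rw [hav, PySem.Dict.get?_insert_self, Option.some_or]
        | none => rw [Option.none_or]
      · have hfind : List.find? (fun p => p.1 == v) (a :: t) =
            List.find? (fun p => p.1 == v) t := by
          rw [List.find?_cons_of_neg]; simp [hav]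
        rw [hfind, ih _ hnd']
        have hd1 : (match F a.1 a.2 with
            | some x => d0.insert a.1 x
            | none => d0).get? v = d0.get? v := by
          cases hF : F a.1 a.2 with
          | some x => exact PySem.Dict.get?_insert_of_ne _ _ (fun h => hav h.symm)
          | none => rfl
        rw [hd1]

theorem pvBPreds_get? (edges : List String)
    (hPre : ∀ e ∈ edges, (PySem.Str.split₀ e).length = 2) (v : String) :
    (pvBPreds edges).get? v =
      if v ∈ pvNodeL (pvE edges) then some (pvPr (pvE edges) v) else none := by
  have hc : (pvBPreds edges).contains v = ((pvBPreds edges).get? v).isSome :=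
    PySem.Dict.contains_eq_isSome_get? _ _
  have hmem := pvBPreds_mem edges hPre v
  rw [← PySem.Dict.contains_iff_mem_keys] at hmem
  have hgd := pvBPreds_getD edges hPre v
  rw [PySem.Dict.getD_eq_get?_getD] at hgd
  by_cases hn : v ∈ pvNodeL (pvE edges)
  · rw [if_pos hn]
    have : (pvBPreds edges).contains v = true := hmem.mpr hn
    rw [hc] at this
    cases hg : (pvBPreds edges).get? v with
    | none => rw [hg] at this; simp at this
    | some l => rw [hg] at hgd; simp at hgd; rw [hgd]
  · rw [if_neg hn]
    cases hg : (pvBPreds edges).get? v with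
    | none => rfl
    | some l =>
        exfalso
        apply hn
        apply hmem.mp
        rw [hc, hg]
        rfl

-- ---- B rounds ----
theorem pvHkD_nonneg (E : List (String × String)) (k : Nat) (q : String) :
    0 ≤ (pvH E k q).getD 0 := by
  cases h : pvH E k q with
  | none => simp
  | some m => simp; exact le_trans (by omega) (pvH_pos h)

theorem pvBRound_get? (edges : List String)
    (hPre : ∀ e ∈ edges, (PySem.Str.split₀ e).length = 2)
    (levels : PySem.Dict String Int) (k : Nat)
    (h : ∀ w, levels.get? w = pvLS (pvE edges) k w) :
    ∀ v, (pvBRound (pvBPreds edges) levels).get? v = pvLS (pvE edges) (k + 1) v := by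
  intro v
  have hcont : ∀ w, levels.contains w = ((pvLS (pvE edges) k w).isSome : Bool) := by
    intro w
    rw [PySem.Dict.contains_eq_isSome_get?, h w]
  have hgd : ∀ w, levels.getD w 0 = (pvLS (pvE edges) k w).getD 0 := by
    intro w
    rw [PySem.Dict.getD_eq_get?_getD, h w]
  rw [pvBRound]
  set myF : String → List String → Option Int := fun n ps =>
    if levels.contains n then some (levels.getD n 0)
    else if ps.all (fun q => levels.contains q) then
      some (1 + PySem.List.maxD (ps.map (fun q => levels.getD q 0)) (fun x => x) 0)
    else none with hF
  rw [PySem.List.foldl_congr_mem _ _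
    (fun nxt p =>
      match myF p.1 p.2 with
      | some x => nxt.insert p.1 x
      | none => nxt) _
    (by
      intro acc x _
      rw [hF]
      by_cases h1 : levels.contains x.1 = true
      · simp [h1]
      · by_cases h2 : x.2.all (fun q => levels.contains q) = true
        · simp [h1, h2]
        · simp [h1, h2])]
  rw [pv_fold_opt_insert_get? _ myF _ (pvBPreds_nodup edges) v]
  have hfind : (pvBPreds edges).items.find? (fun p => p.1 == v) =
      Option.map (fun x => (v, x)) ((pvBPreds edges).get? v) := by
    rw [PySem.Dict.get?]
    cases hf : (pvBPreds edges).items.find? (fun p => p.1 == v) with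
    | none => rfl
    | some p =>
        have hp1 : p.1 = v := by simpa using List.find?_some hf
        obtain ⟨a, b⟩ := p
        simp only at hp1
        subst hp1
        simp [Option.map]
  rw [hfind, pvBPreds_get? edges hPre v]
  by_cases hn : v ∈ pvNodeL (pvE edges)
  · rw [if_pos hn]
    simp only [Option.map, PySem.Dict.get?_empty, Option.or_none]
    rw [hF]
    show (if levels.contains v = true then some (levels.getD v 0)
      else if (pvPr (pvE edges) v).all (fun q => levels.contains q) then
        some (1 + PySem.List.maxD ((pvPr (pvE edges) v).map (fun q => levels.getD q 0))
          (fun x => x) 0)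
      else none) = pvLS (pvE edges) (k + 1) v
    have hLS1 : pvLS (pvE edges) (k + 1) v = pvH (pvE edges) (k + 1) v := if_pos hn
    have hLSk : pvLS (pvE edges) k v = pvH (pvE edges) k v := if_pos hn
    by_cases hsome : (pvH (pvE edges) k v).isSome = true
    · rw [if_pos (by rw [hcont v, hLSk, hsome])]
      rw [hLS1, pvH_mono_eq _ k v hsome, hgd v, hLSk]
      cases hs : pvH (pvE edges) k v with
      | none => rw [hs] at hsome; simp at hsome
      | some m => simp
    · rw [if_neg (by rw [hcont v, hLSk]; simpa using hsome)]
      have hall : ((pvPr (pvE edges) v).all (fun q => levels.contains q)) =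
          ((pvPr (pvE edges) v).all (fun u => (pvH (pvE edges) k u).isSome)) := by
        apply pv_all_congr
        intro u hu
        rw [hcont u, pvLS, if_pos (pv_mem_node_of_mem_pr hu)]
      rw [hLS1, pvH_succ, hall]
      by_cases h2 : ((pvPr (pvE edges) v).all (fun u => (pvH (pvE edges) k u).isSome)) = true
      · rw [if_pos h2, if_pos h2]
        congr 1
        have hmap : (pvPr (pvE edges) v).map (fun q => levels.getD q 0) =
            (pvPr (pvE edges) v).map (fun u => (pvH (pvE edges) k u).getD 0) := by
          apply List.map_congr_left
          intro u hu
          rw [hgd u, pvLS, if_pos (pv_mem_node_of_mem_pr hu)]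
        rw [hmap, pv_maxD_eq_pvM]
        intro x hx
        obtain ⟨u, _, rfl⟩ := List.mem_map.mp hx
        exact pvHkD_nonneg _ k u
      · rw [if_neg h2, if_neg h2]
  · rw [if_neg hn]
    simp only [Option.map, PySem.Dict.get?_empty]
    rw [pvLS, if_neg hn]

theorem pvB_levels (edges : List String)
    (hPre : ∀ e ∈ edges, (PySem.Str.split₀ e).length = 2) :
    ∀ v, ((List.range (pvBPreds edges).size).foldl
        (fun levels _ => pvBRound (pvBPreds edges) levels) PySem.Dict.empty).get? v =
      pvLS (pvE edges) (pvNodeL (pvE edges)).length v := by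
  have hgen : ∀ r v, ((List.range r).foldl
      (fun levels _ => pvBRound (pvBPreds edges) levels) PySem.Dict.empty).get? v =
      pvLS (pvE edges) r v := by
    intro r
    induction r with
    | zero =>
        intro v
        rw [List.range_zero, List.foldl_nil, PySem.Dict.get?_empty, pvLS]
        by_cases hn : v ∈ pvNodeL (pvE edges)
        · rw [if_pos hn, pvH_zero]
        · rw [if_neg hn]
    | succ r ih =>
        intro v
        rw [List.range_succ, List.foldl_append, List.foldl_cons, List.foldl_nil]
        exact pvBRound_get? edges hPre _ r ih v
  intro v
  rw [hgen _ v, pvBPreds_size edges hPre]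

-- ---- A BFS ----
theorem pvLvlSpec_congr (E : List (String × String)) (P P' : List String)
    (h : ∀ x, x ∈ P ↔ x ∈ P') (v : String) :
    pvLvlSpec E P v = pvLvlSpec E P' v := by
  simp only [pvLvlSpec, pvLvlVal, h]

theorem pvPfin_sub (E : List (String × String)) (P : List String)
    (hdef : ∀ v ∈ P, (pvHv E v).isSome)
    (hq : ∀ v, ¬ (v ∈ pvNodeL E ∧ v ∉ P ∧ ∀ u ∈ pvPr E v, u ∈ P)) :
    ∀ v ∈ pvPfin E, v ∈ P := by
  have key : ∀ n : Nat, ∀ v ∈ pvNodeL E, ∀ m : Int,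
      pvHv E v = some m → m.toNat ≤ n → v ∈ P := by
    intro n
    induction n with
    | zero =>
        intro v _ m hm hle
        have h1 : (1:Int) ≤ m := pvH_pos hm
        omega
    | succ n ih =>
        intro v hv m hm hle
        have hdefs : ∀ u ∈ pvPr E v, (pvHv E u).isSome :=
          pvHv_def_closure hv (by rw [hm]; rfl)
        have hfix := pvHv_fix hv hdefs
        rw [hm] at hfix
        have hmval : m = 1 + pvM ((pvPr E v).map (pvHD E)) := Option.some.inj hfix
        have hpred : ∀ u ∈ pvPr E v, u ∈ P := by
          intro u hu
          cases hs : pvHv E u with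
          | none => exact absurd (hdefs u hu) (by rw [hs]; simp)
          | some mu =>
              have hmu1 : (1:Int) ≤ mu := pvH_pos hs
              have hmuM : mu ≤ pvM ((pvPr E v).map (pvHD E)) := by
                apply pvM_le_of_mem
                apply List.mem_map.mpr
                exact ⟨u, hu, by rw [pvHD, hs]; rfl⟩
              exact ih u (pv_mem_node_of_mem_pr hu) mu hs (by omega)
        by_contra hvP
        exact (hq v) ⟨hv, hvP, hpred⟩
  intro v hv
  rw [pvPfin, List.mem_filter] at hv
  obtain ⟨hv1, hv2⟩ := hv
  cases hs : pvHv E v with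
  | none => rw [hs] at hv2; simp at hv2
  | some m => exact key m.toNat v hv1 m hs le_rfl

def pvLvlMid (E : List (String × String)) (P : List String) (c : String)
    (done : List String) (v : String) : Option Int :=
  if v ∈ pvNodeL E ∧ (pvPr E v = [] ∨ (∃ u ∈ pvPr E v, u ∈ P) ∨ v ∈ done) then
    some (1 + pvM (((pvPr E v).filter
      (fun u => decide (u ∈ P) || (u == c && decide (v ∈ done)))).map (pvHD E)))
  else none

structure pvMid (E : List (String × String)) (P : List String) (c : String)
    (done todo : List String) (lv ind : PySem.Dict String Int) (qu : List String) : Prop where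
  ideg : ∀ v, ind.getD v 0 =
    (((pvPr E v).filter (fun u => decide (u ∉ P ++ [c]))).length : Int) + (todo.count v : Int)
  qiff : ∀ v, v ∈ qu ↔ (v ∈ pvNodeL E ∧ v ∉ P ++ [c] ∧
    (∀ u ∈ pvPr E v, u ∈ P ++ [c]) ∧ todo.count v = 0)
  qnd : qu.Nodup
  lvl : ∀ v, lv.get? v = pvLvlMid E P c done v

def pvBStep (cl : Int) (st : PySem.Dict String Int × PySem.Dict String Int × List String)
    (n : String) : PySem.Dict String Int × PySem.Dict String Int × List String :=
  let lv := match st.1.get? n with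
    | none => st.1.insert n (cl + 1)
    | some old => st.1.insert n (max old (cl + 1))
  let ind := st.2.1.insert n (st.2.1.getD n 0 - 1)
  let qu := if ind.getD n 0 == 0 then st.2.2 ++ [n] else st.2.2
  (lv, ind, qu)

theorem pvLvlMid_nil (E : List (String × String)) (P : List String) (c v : String) :
    pvLvlMid E P c [] v = pvLvlSpec E P v := by
  rw [pvLvlMid, pvLvlSpec, pvLvlVal]
  have h1 : ((pvPr E v).filter
      (fun u => decide (u ∈ P) || (u == c && decide (v ∈ ([] : List String))))) =
      ((pvPr E v).filter (fun u => decide (u ∈ P))) := by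
    apply List.filter_congr
    intro u _
    simp
  rw [h1]
  have h2 : (v ∈ pvNodeL E ∧ (pvPr E v = [] ∨ (∃ u ∈ pvPr E v, u ∈ P) ∨
      v ∈ ([] : List String))) ↔
      (v ∈ pvNodeL E ∧ (pvPr E v = [] ∨ ∃ u ∈ pvPr E v, u ∈ P)) := by simp
  by_cases hc : v ∈ pvNodeL E ∧ (pvPr E v = [] ∨ ∃ u ∈ pvPr E v, u ∈ P)
  · rw [if_pos (h2.mpr hc), if_pos hc]
  · rw [if_neg (fun hh => hc (h2.mp hh)), if_neg hc]

theorem pvMid_step (E : List (String × String)) (P : List String) (c : String) (cl : Int)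
    (hcl : cl = pvHD E c) (hcP : c ∉ P)
    (hcpr : ∀ u ∈ pvPr E c, u ∈ P) (hclosed : ∀ v ∈ P, ∀ u ∈ pvPr E v, u ∈ P)
    (done : List String) (n : String) (todo' : List String)
    (hsp : pvSucc E c = done ++ n :: todo')
    (lv ind : PySem.Dict String Int) (qu : List String)
    (hmid : pvMid E P c done (n :: todo') lv ind qu) :
    pvMid E P c (done ++ [n]) todo' (pvBStep cl (lv, ind, qu) n).1
      (pvBStep cl (lv, ind, qu) n).2.1 (pvBStep cl (lv, ind, qu) n).2.2 := by
  obtain ⟨hideg, hqiff, hqnd, hlvl⟩ := hmid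
  have hcprn : c ∈ pvPr E n := (pv_mem_succ_iff E c n).mp (by rw [hsp]; simp)
  have hnnode : n ∈ pvNodeL E :=
    pv_node_of_pr_ne_nil (fun h => by rw [h] at hcprn; simp at hcprn)
  have hnP : n ∉ P := fun hn => hcP (hclosed n hn c hcprn)
  have hnc : n ≠ c := by
    intro h
    rw [h] at hcprn
    exact hcP (hcpr c hcprn)
  have hnP' : n ∉ P ++ [c] := by simp [hnP, hnc]
  have hindn : (ind.insert n (ind.getD n 0 - 1)).getD n 0 =
      (((pvPr E n).filter (fun u => decide (u ∉ P ++ [c]))).length : Int) +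
        (todo'.count n : Int) := by
    rw [PySem.Dict.getD_insert, if_pos rfl, hideg n, List.count_cons_self]
    push_cast
    ring
  have hbase0 : (((pvPr E n).filter (fun u => decide (u ∉ P ++ [c]))).length = 0) ↔
      ∀ u ∈ pvPr E n, u ∈ P ++ [c] := by
    rw [List.length_eq_zero_iff, List.filter_eq_nil_iff]
    simp
    exact ⟨fun h u hu => or_iff_not_imp_left.mpr (h u hu),
      fun h a ha hanP => (h a ha).resolve_left hanP⟩
  have hnqu : n ∉ qu := by
    intro hn
    have := ((hqiff n).mp hn).2.2.2
    rw [List.count_cons_self] at this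
    omega
  have henq_iff : ((ind.insert n (ind.getD n 0 - 1)).getD n 0 == 0) = true ↔
      ((∀ u ∈ pvPr E n, u ∈ P ++ [c]) ∧ todo'.count n = 0) := by
    rw [hindn]
    rw [beq_iff_eq]
    constructor
    · intro h
      have h1 : ((pvPr E n).filter (fun u => decide (u ∉ P ++ [c]))).length = 0 ∧
          todo'.count n = 0 := by omega
      exact ⟨hbase0.mp h1.1, h1.2⟩
    · rintro ⟨h1, h2⟩
      rw [h2, hbase0.mpr h1]
      simp
  have hmidcongr : ∀ v, v ≠ n → pvLvlMid E P c (done ++ [n]) v = pvLvlMid E P c done v := by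
    intro v hvn
    have hmm : (v ∈ done ++ [n]) ↔ v ∈ done := by simp [hvn]
    simp only [pvLvlMid, hmm]
  refine ⟨?_, ?_, ?_, ?_⟩
  · -- ideg
    intro v
    show (ind.insert n (ind.getD n 0 - 1)).getD v 0 = _
    by_cases hv : v = n
    · rw [hv, hindn]
    · rw [PySem.Dict.getD_insert, if_neg hv, hideg v, List.count_cons]
      have hnv : ¬ (n = v) := fun h => hv h.symm
      simp [hv, hnv]
  · -- qiff
    intro v
    show v ∈ (if (ind.insert n (ind.getD n 0 - 1)).getD n 0 == 0
        then qu ++ [n] else qu) ↔ _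
    by_cases hv : v = n
    · subst hv
      by_cases henq : ((ind.insert v (ind.getD v 0 - 1)).getD v 0 == 0) = true
      · rw [if_pos henq]
        have hr := henq_iff.mp henq
        constructor
        · intro _
          exact ⟨hnnode, hnP', hr.1, hr.2⟩
        · intro _
          simp
      · rw [if_neg henq]
        constructor
        · intro hvq
          exact absurd hvq hnqu
        · rintro ⟨_, _, h3, h4⟩
          exact absurd (henq_iff.mpr ⟨h3, h4⟩) henq
    · have hv' : v ∈ (if (ind.insert n (ind.getD n 0 - 1)).getD n 0 == 0
          then qu ++ [n] else qu) ↔ v ∈ qu := by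
        by_cases henq : ((ind.insert n (ind.getD n 0 - 1)).getD n 0 == 0) = true
        · rw [if_pos henq]; simp [hv]
        · rw [if_neg henq]
      rw [hv', hqiff v, List.count_cons]
      have hnv : ¬ (n = v) := fun h => hv h.symm
      simp [hv, hnv]
  · -- qnd
    show (if (ind.insert n (ind.getD n 0 - 1)).getD n 0 == 0
        then qu ++ [n] else qu).Nodup
    by_cases henq : ((ind.insert n (ind.getD n 0 - 1)).getD n 0 == 0) = true
    · rw [if_pos henq]
      simp [List.nodup_append, hqnd]
      intro a ha han
      rw [han] at ha
      exact hnqu ha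
    · rw [if_neg henq]; exact hqnd
  · -- lvl
    intro v
    by_cases hv : v = n
    · subst hv
      show (match lv.get? v with
        | none => lv.insert v (cl + 1)
        | some old => lv.insert v (max old (cl + 1))).get? v =
        pvLvlMid E P c (done ++ [v]) v
      have hvdone' : v ∈ done ++ [v] := by simp
      have hcnd' : v ∈ pvNodeL E ∧ (pvPr E v = [] ∨ (∃ u ∈ pvPr E v, u ∈ P) ∨
          v ∈ done ++ [v]) := ⟨hnnode, Or.inr (Or.inr hvdone')⟩
      have hfil' : (pvPr E v).filter
          (fun u => decide (u ∈ P) || (u == c && decide (v ∈ done ++ [v]))) =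
          (pvPr E v).filter (fun u => decide (u ∈ P) || u == c) := by
        apply List.filter_congr
        intro u _
        simp [hvdone']
      cases hgn : lv.get? v with
      | some old =>
          have hold := hlvl v
          rw [hgn, pvLvlMid] at hold
          by_cases hcnd : v ∈ pvNodeL E ∧ (pvPr E v = [] ∨ (∃ u ∈ pvPr E v, u ∈ P) ∨
              v ∈ done)
          · rw [if_pos hcnd] at hold
            have holdval := Option.some.inj hold
            rw [PySem.Dict.get?_insert_self, pvLvlMid, if_pos hcnd', hfil']
            by_cases hdn : v ∈ done
            · have hfil2 : (pvPr E v).filter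
                  (fun u => decide (u ∈ P) || (u == c && decide (v ∈ done))) =
                  (pvPr E v).filter (fun u => decide (u ∈ P) || u == c) := by
                apply List.filter_congr; intro u _; simp [hdn]
              rw [hfil2] at holdval
              have hcmem : pvHD E c ∈ ((pvPr E v).filter
                  (fun u => decide (u ∈ P) || u == c)).map (pvHD E) :=
                List.mem_map.mpr ⟨c, List.mem_filter.mpr ⟨hcprn, by simp⟩, rfl⟩
              have hle : cl + 1 ≤ old := by
                have := pvM_le_of_mem hcmem
                rw [holdval, hcl]
                omega
              rw [← holdval, max_eq_left hle]
            · have hfil2 : (pvPr E v).filter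
                  (fun u => decide (u ∈ P) || (u == c && decide (v ∈ done))) =
                  (pvPr E v).filter (fun u => decide (u ∈ P)) := by
                apply List.filter_congr; intro u _; simp [hdn]
              rw [hfil2] at holdval
              have hM := pvM_filter_or (pvPr E v) (pvHD E) (fun u => decide (u ∈ P)) c
                hcprn (by simp [hcP]) (pvHD_nonneg E c) (fun x _ => pvHD_nonneg E x)
              rw [hM, holdval, hcl]
              congr 1
              simp only [Int.max_def]
              split_ifs <;> omega
          · rw [if_neg hcnd] at hold
            exact absurd hold.symm (by simp)
      | none =>
          have hold := hlvl v
          rw [hgn, pvLvlMid] at hold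
          by_cases hcnd : v ∈ pvNodeL E ∧ (pvPr E v = [] ∨ (∃ u ∈ pvPr E v, u ∈ P) ∨
              v ∈ done)
          · rw [if_pos hcnd] at hold
            exact absurd hold (by simp)
          · have hnotex : ¬ ∃ u ∈ pvPr E v, u ∈ P := by
              intro hex
              exact hcnd ⟨hnnode, Or.inr (Or.inl hex)⟩
            have hfilP : (pvPr E v).filter (fun u => decide (u ∈ P)) = [] := by
              rw [List.filter_eq_nil_iff]
              intro a ha
              simp only [decide_eq_true_eq]
              intro haP
              exact hnotex ⟨a, ha, haP⟩
            rw [PySem.Dict.get?_insert_self, pvLvlMid, if_pos hcnd', hfil']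
            have hM := pvM_filter_or (pvPr E v) (pvHD E) (fun u => decide (u ∈ P)) c
              hcprn (by simp [hcP]) (pvHD_nonneg E c) (fun x _ => pvHD_nonneg E x)
            rw [hM, hfilP]
            have hmax : max (pvM ((([] : List String)).map (pvHD E))) (pvHD E c) =
                pvHD E c := by
              simp only [List.map_nil]
              exact max_eq_right (by rw [pvM]; simpa using pvHD_nonneg E c)
            rw [hmax, hcl]
            congr 1
            omega
    · have hres : (pvBStep cl (lv, ind, qu) n).1.get? v = lv.get? v := by
        show (match lv.get? n with
          | none => lv.insert n (cl + 1)
          | some old => lv.insert n (max old (cl + 1))).get? v = lv.get? v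
        cases hgn : lv.get? n with
        | none => exact PySem.Dict.get?_insert_of_ne _ _ hv
        | some old => exact PySem.Dict.get?_insert_of_ne _ _ hv
      rw [hres, hlvl v, hmidcongr v hv]

theorem pvMid_fold (E : List (String × String)) (P : List String) (c : String) (cl : Int)
    (hcl : cl = pvHD E c) (hcP : c ∉ P)
    (hcpr : ∀ u ∈ pvPr E c, u ∈ P) (hclosed : ∀ v ∈ P, ∀ u ∈ pvPr E v, u ∈ P) :
    ∀ todo done lv ind qu, pvSucc E c = done ++ todo →
      pvMid E P c done todo lv ind qu →
      pvMid E P c (done ++ todo) []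
        (todo.foldl (pvBStep cl) (lv, ind, qu)).1
        (todo.foldl (pvBStep cl) (lv, ind, qu)).2.1
        (todo.foldl (pvBStep cl) (lv, ind, qu)).2.2 := by
  intro todo
  induction todo with
  | nil =>
      intro done lv ind qu _ hmid
      simpa using hmid
  | cons n todo' ih =>
      intro done lv ind qu hsp hmid
      have hstep := pvMid_step E P c cl hcl hcP hcpr hclosed done n todo' hsp lv ind qu hmid
      have hsp' : pvSucc E c = (done ++ [n]) ++ todo' := by
        rw [hsp]; simp
      have := ih (done ++ [n]) (pvBStep cl (lv, ind, qu) n).1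
        (pvBStep cl (lv, ind, qu) n).2.1 (pvBStep cl (lv, ind, qu) n).2.2 hsp' hstep
      rw [List.foldl_cons]
      have happ : (done ++ [n]) ++ todo' = done ++ n :: todo' := by simp
      rw [happ] at this
      simpa using this

theorem pvLvlMid_full (E : List (String × String)) (P : List String) (c w : String) :
    pvLvlMid E P c (pvSucc E c) w = pvLvlSpec E (P ++ [c]) w := by
  rw [pvLvlMid, pvLvlSpec, pvLvlVal]
  have hcond : (pvPr E w = [] ∨ (∃ u ∈ pvPr E w, u ∈ P) ∨ w ∈ pvSucc E c) ↔
      (pvPr E w = [] ∨ ∃ u ∈ pvPr E w, u ∈ P ++ [c]) := by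
    constructor
    · rintro (h | ⟨u, hu, huP⟩ | h)
      · exact Or.inl h
      · exact Or.inr ⟨u, hu, by simp [huP]⟩
      · exact Or.inr ⟨c, (pv_mem_succ_iff E c w).mp h, by simp⟩
    · rintro (h | ⟨u, hu, huP⟩)
      · exact Or.inl h
      · rcases List.mem_append.mp huP with h | h
        · exact Or.inr (Or.inl ⟨u, hu, h⟩)
        · rw [List.mem_singleton.mp h] at hu
          exact Or.inr (Or.inr ((pv_mem_succ_iff E c w).mpr hu))
  have hfil : (pvPr E w).filter
      (fun u => decide (u ∈ P) || (u == c && decide (w ∈ pvSucc E c))) =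
      (pvPr E w).filter (fun u => decide (u ∈ P ++ [c])) := by
    apply List.filter_congr
    intro u hu
    by_cases huc : u = c
    · subst huc
      have hws : w ∈ pvSucc E u := (pv_mem_succ_iff E u w).mpr hu
      simp [hws, List.mem_append]
    · simp [huc, List.mem_append]
  rw [hfil]
  by_cases hc : w ∈ pvNodeL E ∧ (pvPr E w = [] ∨ ∃ u ∈ pvPr E w, u ∈ P ++ [c])
  · rw [if_pos ⟨hc.1, hcond.mpr hc.2⟩, if_pos hc]
  · rw [if_neg (fun hh => hc ⟨hh.1, hcond.mp hh.2⟩), if_neg hc]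

theorem pvABfs_correct (E : List (String × String)) (graph : PySem.Dict String (List String))
    (hg : ∀ u, graph.getD u [] = pvSucc E u) :
    ∀ fuel P level indeg queue, pvInv E P level indeg queue →
      (pvNodeL E).length - P.length < fuel →
      ∀ v, (pvABfs graph fuel level indeg queue).get? v = pvLvlSpec E (pvPfin E) v := by
  intro fuel
  induction fuel with
  | zero => intro P level indeg queue _ hb; omega
  | succ fuel ih =>
      intro P level indeg queue hinv hb v
      cases queue with
      | nil =>
          show level.get? v = _
          rw [hinv.lvl v]
          apply pvLvlSpec_congr
          intro x
          constructor
          · intro hx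
            exact List.mem_filter.mpr ⟨hinv.psub x hx, hinv.pdef x hx⟩
          · intro hx
            refine pvPfin_sub E P hinv.pdef (fun w hw => ?_) x hx
            exact absurd ((hinv.qiff w).mpr hw) (by simp)
      | cons c q =>
          obtain ⟨hcnode, hcP, hcpr⟩ := (hinv.qiff c).mp (by simp)
          have hcdef : (pvHv E c).isSome := by
            rw [pvHv_fix hcnode (fun u hu => hinv.pdef u (hcpr u hu))]; rfl
          have hfilP : (pvPr E c).filter (fun u => decide (u ∈ P)) = pvPr E c :=
            List.filter_eq_self.mpr (fun a ha => by simp [hcpr a ha])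
          have hcl : level.getD c 0 = pvHD E c := by
            rw [PySem.Dict.getD_eq_get?_getD, hinv.lvl c, pvLvlSpec]
            have hcond : pvPr E c = [] ∨ ∃ u ∈ pvPr E c, u ∈ P := by
              cases hp : pvPr E c with
              | nil => exact Or.inl rfl
              | cons a t =>
                  exact Or.inr ⟨a, by simp [hp], hcpr a (by simp [hp])⟩
            rw [if_pos ⟨hcnode, hcond⟩]
            simp only [Option.getD_some]
            rw [pvLvlVal, hfilP, pvHD,
              pvHv_fix hcnode (fun u hu => hinv.pdef u (hcpr u hu))]
            rfl
          have hmid0 : pvMid E P c [] (pvSucc E c) level indeg q := by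
            refine ⟨?_, ?_, ?_, ?_⟩
            · intro w
              have h1 := pv_count_succ_pr E c w
              have h2 := pv_filter_len_split (pvPr E w) P c hcP
              rw [hinv.ideg w, h1]
              push_cast
              omega
            · intro w
              have hcq : c ∉ q := (List.nodup_cons.mp hinv.qnd).1
              have hcount : (pvSucc E c).count w = (pvPr E w).count c :=
                pv_count_succ_pr E c w
              constructor
              · intro hwq
                obtain ⟨h1, h2, h3⟩ := (hinv.qiff w).mp (List.mem_cons_of_mem c hwq)
                have hwc : w ≠ c := fun h => hcq (h ▸ hwq)
                have hcpr_w : c ∉ pvPr E w := fun hcm => hcP (h3 c hcm)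
                refine ⟨h1, by simp [h2, hwc], fun u hu => by simp [h3 u hu], ?_⟩
                rw [hcount, List.count_eq_zero]
                exact hcpr_w
              · rintro ⟨h1, h2, h3, h4⟩
                rw [hcount, List.count_eq_zero] at h4
                have h3' : ∀ u ∈ pvPr E w, u ∈ P := by
                  intro u hu
                  rcases List.mem_append.mp (h3 u hu) with h | h
                  · exact h
                  · rw [List.mem_singleton.mp h] at hu
                    exact absurd hu h4
                have hw2 : w ∉ P := fun h => h2 (by simp [h])
                have hmem := (hinv.qiff w).mpr ⟨h1, hw2, h3'⟩
                rcases List.mem_cons.mp hmem with h | h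
                · exact absurd (by simp [h]) h2
                · exact h
            · exact (List.nodup_cons.mp hinv.qnd).2
            · intro w
              rw [pvLvlMid_nil]
              exact hinv.lvl w
          have hfold := pvMid_fold E P c (level.getD c 0) hcl hcP hcpr hinv.pclosed
            (pvSucc E c) [] level indeg q (by simp) hmid0
          obtain ⟨mideg, mqiff, mqnd, mlvl⟩ := hfold
          have hinv' : pvInv E (P ++ [c])
              ((pvSucc E c).foldl (pvBStep (level.getD c 0)) (level, indeg, q)).1
              ((pvSucc E c).foldl (pvBStep (level.getD c 0)) (level, indeg, q)).2.1
              ((pvSucc E c).foldl (pvBStep (level.getD c 0)) (level, indeg, q)).2.2 := by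
            refine ⟨?_, ?_, ?_, ?_, ?_, ?_, ?_, ?_⟩
            · simp [List.nodup_append, hinv.pnd]
              intro a ha hac
              rw [hac] at ha
              exact hcP ha
            · intro w hw
              rcases List.mem_append.mp hw with h | h
              · exact hinv.psub w h
              · rw [List.mem_singleton.mp h]; exact hcnode
            · intro w hw u hu
              rcases List.mem_append.mp hw with h | h
              · exact List.mem_append.mpr (Or.inl (hinv.pclosed w h u hu))
              · rw [List.mem_singleton.mp h] at hu
                exact List.mem_append.mpr (Or.inl (hcpr u hu))
            · intro w hw
              rcases List.mem_append.mp hw with h | h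
              · exact hinv.pdef w h
              · rw [List.mem_singleton.mp h]; exact hcdef
            · intro w
              rw [mqiff w]
              simp
            · exact mqnd
            · intro w
              rw [mideg w]
              simp
            · intro w
              rw [mlvl w]
              rw [show ([] : List String) ++ pvSucc E c = pvSucc E c from rfl]
              exact pvLvlMid_full E P c w
          have hlenP' : (P ++ [c]).length ≤ (pvNodeL E).length :=
            pv_nodup_sub_len hinv'.pnd hinv'.psub
          show ((pvABfs graph fuel
            ((graph.getD c []).foldl (pvBStep (level.getD c 0)) (level, indeg, q)).1
            ((graph.getD c []).foldl (pvBStep (level.getD c 0)) (level, indeg, q)).2.1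
            ((graph.getD c []).foldl (pvBStep (level.getD c 0)) (level, indeg, q)).2.2)).get? v = _
          rw [hg c]
          apply ih (P ++ [c]) _ _ _ hinv' _ v
          simp only [List.length_append, List.length_singleton] at hlenP' ⊢
          omega

theorem pv_fold_pair_if (p : String → Bool) (keys : List String) :
    ∀ (d : PySem.Dict String Int) (q : List String),
      (keys.foldl (fun st w => if p w then (st.1.insert w 1, st.2 ++ [w]) else st) (d, q)) =
      (keys.foldl (fun d w => if p w then d.insert w 1 else d) d,
       keys.foldl (fun q w => if p w then q ++ [w] else q) q) := by
  induction keys with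
  | nil => intro d q; rfl
  | cons y t ih =>
      intro d q
      simp only [List.foldl_cons]
      by_cases hp : p y = true
      · rw [if_pos hp, if_pos hp, if_pos hp]; exact ih _ _
      · rw [if_neg hp, if_neg hp, if_neg hp]; exact ih _ _

theorem pvAInit_split (indeg : PySem.Dict String Int) :
    pvAInit indeg =
      (indeg.keys.foldl (fun d w => if indeg.getD w 0 == 0 then d.insert w 1 else d)
        PySem.Dict.empty,
       indeg.keys.foldl (fun q w => if indeg.getD w 0 == 0 then q ++ [w] else q) []) := by
  rw [pvAInit]
  exact pv_fold_pair_if (fun w => indeg.getD w 0 == 0) indeg.keys PySem.Dict.empty []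

theorem pvAInit_spec (edges : List String)
    (hPre : ∀ e ∈ edges, (PySem.Str.split₀ e).length = 2) :
    pvInv (pvE edges) [] (pvAInit (pvABuild edges).2).1 (pvABuild edges).2
      (pvAInit (pvABuild edges).2).2 := by
  have hnd := pvABuild_indeg_nodup edges
  have hmem := pvABuild_indeg_mem edges hPre
  have hgd := pvABuild_indeg_getD edges hPre
  rw [pvAInit_split]
  have hqeq : (pvABuild edges).2.keys.foldl
      (fun q w => if (pvABuild edges).2.getD w 0 == 0 then q ++ [w] else q) [] =
      (pvABuild edges).2.keys.filter (fun w => (pvABuild edges).2.getD w 0 == 0) := by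
    have := PySem.List.foldl_append_if (fun w => (pvABuild edges).2.getD w 0 == 0)
      (fun w => w) (pvABuild edges).2.keys []
    simpa using this
  have hsource : ∀ v, ((pvABuild edges).2.getD v 0 == 0) = true ↔ pvPr (pvE edges) v = [] := by
    intro v
    rw [hgd v]
    constructor
    · intro h
      have : ((pvPr (pvE edges) v).length : Int) = 0 := by simpa using h
      have h2 : (pvPr (pvE edges) v).length = 0 := by exact_mod_cast this
      exact List.length_eq_zero_iff.mp h2
    · intro h; rw [h]; simp
  constructor
  · exact List.nodup_nil
  · intro v hv; simp at hv
  · intro v hv; simp at hv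
  · intro v hv; simp at hv
  · intro v
    rw [hqeq, List.mem_filter]
    constructor
    · rintro ⟨h1, h2⟩
      refine ⟨(hmem v).mp h1, by simp, ?_⟩
      intro u hu
      rw [(hsource v).mp h2] at hu
      simp at hu
    · rintro ⟨h1, _, h3⟩
      refine ⟨(hmem v).mpr h1, (hsource v).mpr ?_⟩
      cases hp : pvPr (pvE edges) v with
      | nil => rfl
      | cons a t =>
          exfalso
          have := h3 a (by rw [hp]; simp)
          simp at this
  · rw [hqeq]; exact List.Nodup.filter _ hnd
  · intro v
    rw [hgd v]
    congr 1
    have : (pvPr (pvE edges) v).filter (fun u => decide (u ∉ ([] : List String))) =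
        pvPr (pvE edges) v := List.filter_eq_self.mpr (fun a _ => by simp)
    rw [this]
  · intro v
    rw [pv_fold_cond_insert_get? _ _ _ hnd v, pvLvlSpec]
    by_cases hc : v ∈ (pvABuild edges).2.keys ∧ ((pvABuild edges).2.getD v 0 == 0) = true
    · rw [if_pos hc]
      have hnode := (hmem v).mp hc.1
      have hprnil := (hsource v).mp hc.2
      rw [if_pos ⟨hnode, Or.inl hprnil⟩, pvLvlVal, hprnil]
      simp [pvM]
    · rw [if_neg hc, PySem.Dict.get?_empty]
      by_cases hcond : v ∈ pvNodeL (pvE edges) ∧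
          (pvPr (pvE edges) v = [] ∨ ∃ u ∈ pvPr (pvE edges) v, u ∈ ([] : List String))
      · exfalso
        apply hc
        obtain ⟨h1, h2⟩ := hcond
        rcases h2 with h2 | h2
        · exact ⟨(hmem v).mpr h1, (hsource v).mpr h2⟩
        · obtain ⟨u, _, hu⟩ := h2; simp at hu
      · rw [if_neg hcond]

-- ---- per-word values ----
-- The word predicate that D_ quantifies over.
def pvBad (E : List (String × String)) (w : String) : Prop :=
  w ∈ pvNodeL E ∧ pvHv E w = none ∧ ∃ u ∈ pvPr E w, (pvHv E u).isSome = true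

theorem pv_all_filter (E : List (String × String)) (v : String) (g : String → Bool) :
    (E.all fun p => p.2 != v || g p.1) =
      ((E.filter (fun p => p.2 == v)).map (fun p => p.1)).all g := by
  induction E with
  | nil => rfl
  | cons a t ih =>
      by_cases h : a.2 = v
      · simp only [List.all_cons, List.filter_cons, h, BEq.rfl, if_true, List.map_cons,
          bne_self_eq_false, Bool.false_or, ih]
      · have hb : (a.2 == v) = false := by simp [h]
        simp only [List.all_cons, List.filter_cons, hb, Bool.false_eq_true, if_false,
          bne, hb, Bool.not_false, Bool.true_or, Bool.true_and]
        simpa [bne] using ih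

theorem pvOk_eq (E : List (String × String)) (k : Nat) :
    ∀ v, pvOk E k v = (pvH E k v).isSome := by
  induction k with
  | zero => intro v; rfl
  | succ k ih =>
      intro v
      show (E.all fun p => p.2 != v || pvOk E k p.1) = _
      rw [pvH_succ, pv_all_filter E v (pvOk E k)]
      have h1 : ((E.filter (fun p => p.2 == v)).map (fun p => p.1)).all (pvOk E k)
          = (pvPr E v).all (fun u => (pvH E k u).isSome) := by
        rw [pvPr]
        have h2 : ∀ (l : List String), l.all (pvOk E k) =
            l.all (fun u => (pvH E k u).isSome) := by
          intro l
          induction l with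
          | nil => rfl
          | cons a t iht => simp only [List.all_cons, ih a, iht]
        exact h2 _
      rw [h1]
      by_cases hall : (pvPr E v).all (fun u => (pvH E k u).isSome) = true
      · rw [if_pos hall, hall]; rfl
      · rw [if_neg hall]
        simpa using hall

theorem pvOk_not_node (E : List (String × String)) (k : Nat) (v : String)
    (hv : v ∉ pvNodeL E) : pvOk E (k + 1) v = true := by
  show (E.all fun p => p.2 != v || pvOk E k p.1) = true
  rw [List.all_eq_true]
  intro p hp
  have h : p.2 ≠ v := fun he => hv (pv_mem_nodeL.mpr ⟨p, hp, Or.inr he⟩)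
  simp [h]

theorem pvOk_limit (edges : List String) (v : String) (hv : v ∈ pvNodeL (pvE edges)) :
    pvOkL edges v = (pvHv (pvE edges) v).isSome := by
  rw [pvOkL, pvOk_eq]
  have hN : (pvNodeL (pvE edges)).length ≤ 2 * edges.length + 2 := by
    have h1 := pv_nodeL_len_le (pvE edges)
    have h2 := pvE_len_le edges
    omega
  have hs := pvH_stable (pvE edges) (2 * edges.length + 2 - (pvNodeL (pvE edges)).length) v hv
  rw [show (pvNodeL (pvE edges)).length +
    (2 * edges.length + 2 - (pvNodeL (pvE edges)).length) = 2 * edges.length + 2 by omega] at hs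
  rw [hs]

theorem pv_mem_pr_iff (E : List (String × String)) (u w : String) :
    u ∈ pvPr E w ↔ ∃ p ∈ E, p.2 = w ∧ p.1 = u := by
  rw [pvPr]
  constructor
  · intro h
    obtain ⟨p, hp, rfl⟩ := List.mem_map.mp h
    obtain ⟨hpE, hb⟩ := List.mem_filter.mp hp
    exact ⟨p, hpE, by simpa using hb, rfl⟩
  · rintro ⟨p, hpE, hb, rfl⟩
    exact List.mem_map.mpr ⟨p, List.mem_filter.mpr ⟨hpE, by simpa using hb⟩, rfl⟩

theorem pvBad_iff (edges : List String) (w : String) :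
    (pvOkL edges w = false ∧
      ∃ p ∈ pvE edges, p.2 = w ∧ pvOkL edges p.1 = true) ↔ pvBad (pvE edges) w := by
  constructor
  · rintro ⟨hf, p, hpE, hpw, hok⟩
    have hn : w ∈ pvNodeL (pvE edges) := by
      by_contra hnn
      rw [pvOkL, show 2 * edges.length + 2 = (2 * edges.length + 1) + 1 from rfl,
        pvOk_not_node (pvE edges) _ w hnn] at hf
      simp at hf
    have hnone : pvHv (pvE edges) w = none := by
      have h := pvOk_limit edges w hn
      rw [hf] at h
      exact Option.not_isSome_iff_eq_none.mp (by simp [← h])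
    have hu : p.1 ∈ pvPr (pvE edges) w := (pv_mem_pr_iff (pvE edges) p.1 w).mpr ⟨p, hpE, hpw, rfl⟩
    have hunode : p.1 ∈ pvNodeL (pvE edges) := pv_mem_node_of_mem_pr hu
    have hus : (pvHv (pvE edges) p.1).isSome = true := by
      rw [← pvOk_limit edges p.1 hunode]; exact hok
    exact ⟨hn, hnone, p.1, hu, hus⟩
  · rintro ⟨hn, hnone, u, hu, hus⟩
    refine ⟨by rw [pvOk_limit edges w hn, hnone]; rfl, ?_⟩
    obtain ⟨p, hpE, hpw, hpu⟩ := (pv_mem_pr_iff (pvE edges) u w).mp hu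
    refine ⟨p, hpE, hpw, ?_⟩
    rw [hpu, pvOk_limit edges u (pv_mem_node_of_mem_pr hu)]
    exact hus

theorem pv_mem_pfin (E : List (String × String)) (u : String) :
    u ∈ pvPfin E ↔ (u ∈ pvNodeL E ∧ (pvHv E u).isSome = true) := List.mem_filter

theorem pv_lvlspec_of_some {E : List (String × String)} {w : String}
    (hn : w ∈ pvNodeL E) (hs : (pvHv E w).isSome) :
    pvLvlSpec E (pvPfin E) w = pvHv E w := by
  have hpreds_def := pvHv_def_closure hn hs
  have hApreds : ∀ u ∈ pvPr E w, u ∈ pvPfin E := fun u hu =>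
    (pv_mem_pfin E u).mpr ⟨pv_mem_node_of_mem_pr hu, hpreds_def u hu⟩
  have hfilA : (pvPr E w).filter (fun u => decide (u ∈ pvPfin E)) = pvPr E w :=
    List.filter_eq_self.mpr (fun a ha => by simp [hApreds a ha])
  rw [pvLvlSpec]
  have hcond : pvPr E w = [] ∨ ∃ u ∈ pvPr E w, u ∈ pvPfin E := by
    cases hp : pvPr E w with
    | nil => exact Or.inl rfl
    | cons a t => exact Or.inr ⟨a, by simp [hp], hApreds a (by simp [hp])⟩
  rw [if_pos ⟨hn, hcond⟩, pvLvlVal, hfilA, pvHv_fix hn hpreds_def]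

theorem pv_word_eq (E : List (String × String)) (w : String) (hnb : ¬ pvBad E w) :
    (pvLvlSpec E (pvPfin E) w).getD 1 = (pvLS E (pvNodeL E).length w).getD 1 := by
  by_cases hn : w ∈ pvNodeL E
  · have hLS : pvLS E (pvNodeL E).length w = pvHv E w := if_pos hn
    by_cases hs : (pvHv E w).isSome = true
    · rw [pv_lvlspec_of_some hn hs, hLS]
    · have hnone : pvHv E w = none := Option.not_isSome_iff_eq_none.mp (by simpa using hs)
      have hnopred : ¬ ∃ u ∈ pvPr E w, (pvHv E u).isSome = true :=
        fun hex => hnb ⟨hn, hnone, hex⟩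
      have hprne : pvPr E w ≠ [] := by
        intro hp
        rw [pvHv_fix hn (fun u hu => by rw [hp] at hu; simp at hu)] at hnone
        simp at hnone
      have hcnd : ¬ (w ∈ pvNodeL E ∧ (pvPr E w = [] ∨ ∃ u ∈ pvPr E w, u ∈ pvPfin E)) := by
        rintro ⟨_, h | ⟨u, hu, huP⟩⟩
        · exact hprne h
        · exact hnopred ⟨u, hu, ((pv_mem_pfin E u).mp huP).2⟩
      rw [pvLvlSpec, if_neg hcnd, hLS, hnone]
  · rw [pvLvlSpec, if_neg (fun hh => hn hh.1), pvLS, if_neg hn]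

theorem pv_word_lt (E : List (String × String)) (w : String) (hb : pvBad E w) :
    (pvLS E (pvNodeL E).length w).getD 1 < (pvLvlSpec E (pvPfin E) w).getD 1 := by
  obtain ⟨hn, hnone, u, hu, hus⟩ := hb
  have hB : (pvLS E (pvNodeL E).length w).getD 1 = 1 := by
    rw [pvLS, if_pos hn]
    show (pvHv E w).getD 1 = 1
    rw [hnone]; rfl
  have huP : u ∈ pvPfin E := (pv_mem_pfin E u).mpr ⟨pv_mem_node_of_mem_pr hu, hus⟩
  have hcond : w ∈ pvNodeL E ∧ (pvPr E w = [] ∨ ∃ u ∈ pvPr E w, u ∈ pvPfin E) :=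
    ⟨hn, Or.inr ⟨u, hu, huP⟩⟩
  rw [hB, pvLvlSpec, if_pos hcond]
  show 1 < (some (pvLvlVal E (pvPfin E) w)).getD 1
  rw [Option.getD_some, pvLvlVal]
  have hmem : pvHD E u ∈ ((pvPr E w).filter (fun x => decide (x ∈ pvPfin E))).map (pvHD E) :=
    List.mem_map.mpr ⟨u, List.mem_filter.mpr ⟨hu, by simp [huP]⟩, rfl⟩
  have hle := pvM_le_of_mem hmem
  have hu1 : 1 ≤ pvHD E u := by
    rw [pvHD]
    cases hs : pvHv E u with
    | none => rw [hs] at hus; simp at hus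
    | some m => simpa using pvH_pos hs
  omega

theorem pv_word_le (E : List (String × String)) (w : String) :
    (pvLS E (pvNodeL E).length w).getD 1 ≤ (pvLvlSpec E (pvPfin E) w).getD 1 := by
  by_cases hb : pvBad E w
  · exact le_of_lt (pv_word_lt E w hb)
  · rw [pv_word_eq E w hb]

-- ---- sum lemmas ----
theorem pv_foldl_add_lt (l : List String) (f g : String → Int)
    (hle : ∀ w ∈ l, f w ≤ g w) :
    ∀ a b : Int, a < b →
      l.foldl (fun t w => t + f w) a < l.foldl (fun t w => t + g w) b := by
  induction l with
  | nil => intro a b hab; simpa using hab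
  | cons y t ih =>
      intro a b hab
      simp only [List.foldl_cons]
      exact ih (fun w hw => hle w (by simp [hw])) _ _
        (by have := hle y (by simp); omega)

theorem pv_foldl_add_lt_of_exists (l : List String) (f g : String → Int)
    (hle : ∀ w ∈ l, f w ≤ g w) :
    ∀ a b : Int, a ≤ b → (∃ w ∈ l, f w < g w) →
      l.foldl (fun t w => t + f w) a < l.foldl (fun t w => t + g w) b := by
  induction l with
  | nil => rintro a b _ ⟨w, hw, _⟩; simp at hw
  | cons y t ih =>
      rintro a b hab ⟨w, hw, hlt⟩
      simp only [List.foldl_cons]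
      by_cases hy : f y < g y
      · exact pv_foldl_add_lt t f g (fun x hx => hle x (by simp [hx])) _ _ (by omega)
      · have hwt : w ∈ t := by
          rcases List.mem_cons.mp hw with rfl | h
          · exact absurd hlt hy
          · exact h
        exact ih (fun x hx => hle x (by simp [hx])) _ _
          (by have := hle y (by simp); omega) ⟨w, hwt, hlt⟩

-- ---- final assembly ----
theorem pvA_unfold (edges : List String) (input_string : String) :
    calculate_string_value edges input_string =
      (PySem.Str.split₀ input_string).foldl (fun total w => total +
        (pvABfs (pvABuild edges).1 (2 * edges.length + 1)
          (pvAInit (pvABuild edges).2).1 (pvABuild edges).2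
          (pvAInit (pvABuild edges).2).2).getD w 1) 0 := rfl

theorem pvB_unfold (edges : List String) (input_string : String) :
    calculate_string_value_alt edges input_string =
      (PySem.Str.split₀ input_string).foldl (fun total w => total +
        ((List.range (pvBPreds edges).size).foldl
          (fun levels _ => pvBRound (pvBPreds edges) levels)
          PySem.Dict.empty).getD w 1) 0 := rfl

theorem pvA_word (edges : List String)
    (hPre : ∀ e ∈ edges, (PySem.Str.split₀ e).length = 2) (w : String) :
    (pvABfs (pvABuild edges).1 (2 * edges.length + 1)
      (pvAInit (pvABuild edges).2).1 (pvABuild edges).2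
      (pvAInit (pvABuild edges).2).2).getD w 1 =
      (pvLvlSpec (pvE edges) (pvPfin (pvE edges)) w).getD 1 := by
  rw [PySem.Dict.getD_eq_get?_getD]
  congr 1
  apply pvABfs_correct (pvE edges) _ (pvABuild_graph edges hPre)
    _ [] _ _ _ (pvAInit_spec edges hPre)
  have h1 := pv_nodeL_len_le (pvE edges)
  have h2 := pvE_len_le edges
  simp only [List.length_nil, Nat.sub_zero]
  omega

theorem pvB_word (edges : List String)
    (hPre : ∀ e ∈ edges, (PySem.Str.split₀ e).length = 2) (w : String) :
    ((List.range (pvBPreds edges).size).foldl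
      (fun levels _ => pvBRound (pvBPreds edges) levels)
      PySem.Dict.empty).getD w 1 =
      (pvLS (pvE edges) (pvNodeL (pvE edges)).length w).getD 1 := by
  rw [PySem.Dict.getD_eq_get?_getD, pvB_levels edges hPre w]

-- ===== VERDICT (by name: the statements are the Claim_ definitions above) =====
theorem calculate_string_value_spec : Claim_unchanged_calculate_string_value := by
  unfold Claim_unchanged_calculate_string_value
  intro edges input_string _ hPre hnD
  have hPre' : ∀ e ∈ edges, (PySem.Str.split₀ e).length = 2 := hPre
  rw [pvA_unfold, pvB_unfold]
  apply PySem.List.foldl_congr_mem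
  intro acc w hw
  have hnb : ¬ pvBad (pvE edges) w := by
    intro hb
    obtain ⟨h1, p, hpE, hpw, h2⟩ := (pvBad_iff edges w).mpr hb
    exact hnD ⟨p, hpE, by rw [hpw]; exact hw, by rw [hpw]; exact h1, h2⟩
  rw [pvA_word edges hPre' w, pvB_word edges hPre' w, pv_word_eq (pvE edges) w hnb]

theorem calculate_string_value_changed : Claim_changed_calculate_string_value := by
  unfold Claim_changed_calculate_string_value; decide

theorem calculate_string_value_tight : Claim_exact_calculate_string_value := by
  unfold Claim_exact_calculate_string_value
  intro edges input_string _ hPre hD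
  have hPre' : ∀ e ∈ edges, (PySem.Str.split₀ e).length = 2 := hPre
  obtain ⟨p, hpE, hw, hb1, hb2⟩ := hD
  have hb : pvBad (pvE edges) p.2 := (pvBad_iff edges p.2).mp ⟨hb1, p, hpE, rfl, hb2⟩
  have hlt : calculate_string_value_alt edges input_string <
      calculate_string_value edges input_string := by
    rw [pvA_unfold, pvB_unfold]
    apply pv_foldl_add_lt_of_exists
    · intro x _
      rw [pvA_word edges hPre' x, pvB_word edges hPre' x]
      exact pv_word_le (pvE edges) x
    · exact le_refl 0
    · refine ⟨p.2, hw, ?_⟩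
      rw [pvA_word edges hPre' p.2, pvB_word edges hPre' p.2]
      exact pv_word_lt (pvE edges) p.2 hb
  omega
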